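-- pv_equiv track=rewrite | github.com/grapheneaffiliate/h4-polytopic-attention | solve_arc_b24.py | solve_fcc82909
-- ===== SOURCE A (Python) =====
-- def solve_fcc82909(grid):
--     """2x2 colored blocks. Extend with 3s to fill remaining space below/around."""
--     R, C = len(grid), len(grid[0])
--     out = [row[:] for row in grid]
--
--     # Find 2x2 colored blocks
--     visited = set()
--     blocks = []
--     for r in range(R):
--         for c in range(C):
--             if grid[r][c]!=0 and (r,c) not in visited:
--                 comp = []
--                 stack = [(r,c)]
--                 while stack:
--                     cr,cc = stack.pop()
--                     if (cr,cc) in visited or grid[cr][cc]==0: continue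
--                     visited.add((cr,cc))
--                     comp.append((cr,cc,grid[cr][cc]))
--                     for dr,dc in [(-1,0),(1,0),(0,-1),(0,1)]:
--                         nr,nc=cr+dr,cc+dc
--                         if 0<=nr<R and 0<=nc<C and (nr,nc) not in visited and grid[nr][nc]!=0:
--                             stack.append((nr,nc))
--                 blocks.append(comp)
--
--     # Each block is a 2x2 colored pattern. Extend downward with 3s until hitting grid edge or another block.
--     # Looking at the output: below each 2x2 block, a column of 3x2 (same width) extends downward
--     # Actually: fill 3s in the columns of each block going downward (and upward?) to fill empty space
--
--     for block in blocks:
--         min_r = min(r for r,c,v in block)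
--         max_r = max(r for r,c,v in block)
--         min_c = min(c for r,c,v in block)
--         max_c = max(c for r,c,v in block)
--
--         # Extend downward
--         for r in range(max_r+1, R):
--             all_zero = all(grid[r][c]==0 for c in range(min_c, max_c+1))
--             if not all_zero: break
--             for c in range(min_c, max_c+1):
--                 out[r][c] = 3
--
--         # Extend upward
--         for r in range(min_r-1, -1, -1):
--             all_zero = all(grid[r][c]==0 for c in range(min_c, max_c+1))
--             if not all_zero: break
--             for c in range(min_c, max_c+1):
--                 out[r][c] = 3
--
--     return out
-- ===== SOURCE B (Python) =====
-- def solve_fcc82909(grid):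
--     """2x2 colored blocks. Extend with 3s to fill remaining space below/around."""
--     R, C = len(grid), len(grid[0])
--     cells = [(r, c) for r, row in enumerate(grid)
--              for c, v in enumerate(row[:C]) if v != 0]
--
--     def near(S):
--         return [p for p in cells if p not in S and
--                 any(abs(p[0] - q[0]) + abs(p[1] - q[1]) == 1 for q in S)]
--
--     def blank(r, mc, Mc):
--         return not any(q[0] == r and mc <= q[1] <= Mc for q in cells)
--
--     def grow(rs, mc, Mc):
--         out = []
--         for r in rs:
--             if not blank(r, mc, Mc):
--                 break
--             out.append(r)
--         return out
--
--     seen = set()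
--     fills = set()
--     for cell in cells:
--         if cell in seen:
--             continue
--         comp = [cell]
--         frontier = near(comp)
--         while frontier:
--             comp = comp + frontier
--             frontier = near(comp)
--         seen |= set(comp)
--         mr = Mr = cell[0]
--         mc = Mc = cell[1]
--         for (r, c) in comp:
--             mr = min(mr, r)
--             Mr = max(Mr, r)
--             mc = min(mc, c)
--             Mc = max(Mc, c)
--         rows = grow(list(range(Mr + 1, R)), mc, Mc) + \
--                grow(list(range(mr - 1, -1, -1)), mc, Mc)
--         for r in rows:
--             for c in range(mc, Mc + 1):
--                 fills.add((r, c))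
--     return [[3 if (r, c) in fills else v for c, v in enumerate(row)]
--             for r, row in enumerate(grid)]
-- ===== Notes on version B (the rewrite author's own statement) =====
-- stated objective: alternative
-- what changed: Replaces the stack-based DFS with visited set and in-place grid mutation by a frontier-saturation component search over a precomputed nonzero-cell list (adjacency by Manhattan distance 1, row blankness tested by membership in that list, bounding box by a single min/max accumulator pass), collecting the 3-cells in a set rendered in one final comprehension.
import Mathlib
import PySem

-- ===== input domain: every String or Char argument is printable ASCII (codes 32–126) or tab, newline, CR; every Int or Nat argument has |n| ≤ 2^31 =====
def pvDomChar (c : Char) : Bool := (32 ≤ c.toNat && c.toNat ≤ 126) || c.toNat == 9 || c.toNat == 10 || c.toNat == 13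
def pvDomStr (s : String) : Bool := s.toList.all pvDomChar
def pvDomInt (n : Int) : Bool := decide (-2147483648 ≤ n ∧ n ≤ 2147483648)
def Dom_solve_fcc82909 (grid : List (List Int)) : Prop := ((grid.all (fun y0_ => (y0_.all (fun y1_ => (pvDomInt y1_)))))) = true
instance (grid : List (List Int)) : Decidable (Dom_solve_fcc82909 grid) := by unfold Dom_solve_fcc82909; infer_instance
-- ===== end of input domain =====

-- B replaces A's stack-based DFS flood fill with in-place grid mutation by a frontier-saturation
-- component search over a precomputed nonzero-cell list (Manhattan-distance adjacency, list-membership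
-- blank test, accumulator bounding box) collecting the 3-cells in a set (objective: alternative).

-- ===== PORT A =====

-- the four neighbour offsets [(-1,0),(1,0),(0,-1),(0,1)]
def pvDirs : List (Int × Int) := [(-1, 0), (1, 0), (0, -1), (0, 1)]

-- grid[r][c]; every use in the port is at an in-range nonnegative index under Pre_
def pvGv (grid : List (List Int)) (r c : Int) : Int :=
  PySem.List.pyGetD (PySem.List.pyGetD grid r []) c 0

-- all(grid[r][c]==0 for c in range(mc, Mc+1))
def pvAllZero (grid : List (List Int)) (r mc Mc : Int) : Bool :=
  (PySem.List.pyRange mc (Mc + 1) 1).all (fun c => pvGv grid r c == 0)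

-- the DFS 'while stack:' loop; fuel only makes the recursion structural (never exhausted
-- at the fuel the port passes; head of the list = top of Python's stack)
def pvDfs (grid : List (List Int)) (R C : Int) :
    Nat → PySem.Set (Int × Int) → List (Int × Int × Int) → List (Int × Int) →
    PySem.Set (Int × Int) × List (Int × Int × Int)
  | 0, visited, comp, _ => (visited, comp)
  | _ + 1, visited, comp, [] => (visited, comp)
  | fuel + 1, visited, comp, (cr, cc) :: stack =>
    if PySem.Set.contains visited (cr, cc) || pvGv grid cr cc == 0 then
      pvDfs grid R C fuel visited comp stack
    else
      let visited' := PySem.Set.add visited (cr, cc)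
      let comp' := comp ++ [(cr, cc, pvGv grid cr cc)]
      let stack' := pvDirs.foldl (fun st d =>
        if decide (0 ≤ cr + d.1) && decide (cr + d.1 < R) && decide (0 ≤ cc + d.2) &&
            decide (cc + d.2 < C) && !(PySem.Set.contains visited' (cr + d.1, cc + d.2)) &&
            !(pvGv grid (cr + d.1) (cc + d.2) == 0)
        then (cr + d.1, cc + d.2) :: st else st) stack
      pvDfs grid R C fuel visited' comp' stack'

-- one pass of 'for c in range(min_c, max_c+1): out[r][c] = 3'
def pvWriteRow (out : List (List Int)) (r mc Mc : Int) : List (List Int) :=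
  (PySem.List.pyRange mc (Mc + 1) 1).foldl
    (fun o c => PySem.List.pySetD o r (PySem.List.pySetD (PySem.List.pyGetD o r []) c 3)) out

-- 'for r in rows: if not all_zero: break; write row'
def pvExtend (grid : List (List Int)) (mc Mc : Int) (out : List (List Int)) :
    List Int → List (List Int)
  | [] => out
  | r :: rest =>
    if pvAllZero grid r mc Mc then pvExtend grid mc Mc (pvWriteRow out r mc Mc) rest else out

-- the body of 'for block in blocks:'
def pvFill (grid : List (List Int)) (R : Int) (out : List (List Int))
    (block : List (Int × Int × Int)) : List (List Int) :=
  match PySem.List.min? (block.map (fun t => t.1)) (fun x => x),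
        PySem.List.max? (block.map (fun t => t.1)) (fun x => x),
        PySem.List.min? (block.map (fun t => t.2.1)) (fun x => x),
        PySem.List.max? (block.map (fun t => t.2.1)) (fun x => x) with
  | some mr, some Mr, some mc, some Mc =>
      let out1 := pvExtend grid mc Mc out (PySem.List.pyRange (Mr + 1) R 1)
      pvExtend grid mc Mc out1 (PySem.List.pyRange (mr - 1) (-1) (-1))
  | _, _, _, _ => out   -- unreachable: a block is never empty

def solve_fcc82909 (grid : List (List Int)) : List (List Int) :=
  let R : Int := PySem.List.len grid
  let C : Int := PySem.List.len (PySem.List.pyGetD grid 0 [])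
  let out0 := grid.map (fun row => PySem.List.slice row none none)
  let st := (PySem.List.pyRange 0 R 1).foldl (fun s r =>
      (PySem.List.pyRange 0 C 1).foldl (fun s c =>
        if !(pvGv grid r c == 0) && !(PySem.Set.contains s.1 (r, c)) then
          let res := pvDfs grid R C (5 * (R.toNat * C.toNat) + 2) s.1 [] [(r, c)]
          (res.1, s.2 ++ [res.2])
        else s) s)
      ((PySem.Set.empty : PySem.Set (Int × Int)), ([] : List (List (Int × Int × Int))))
  st.2.foldl (fun o block => pvFill grid R o block) out0

-- ===== PORT B =====

-- the 'cells' comprehension: coordinates of each nonzero value of row[:C], by enumerate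
def pvCellsOf (grid : List (List Int)) (C : Int) : List (Int × Int) :=
  (PySem.List.enumerate grid 0).flatMap (fun rr =>
    ((PySem.List.enumerate (PySem.List.slice rr.2 none (some C)) 0).filter
      (fun cv => !(cv.2 == 0))).map (fun cv => (rr.1, cv.1)))

-- near(S): listed cells outside S at Manhattan distance 1 from some member of S
def pvNear (cells S : List (Int × Int)) : List (Int × Int) :=
  cells.filter (fun p => !(S.contains p) &&
    S.any (fun q => (p.1 - q.1).natAbs + (p.2 - q.2).natAbs == 1))

-- blank r: no listed cell in row r between columns mc and Mc
def pvBlank (cells : List (Int × Int)) (r mc Mc : Int) : Bool :=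
  !(cells.any (fun q => q.1 == r && decide (mc ≤ q.2) && decide (q.2 ≤ Mc)))

-- grow: the for/break loop collecting the blank prefix of a row list
def pvGrow (cells : List (Int × Int)) (mc Mc : Int) : List Int → List Int
  | [] => []
  | r :: rest =>
    if pvBlank cells r mc Mc then r :: pvGrow cells mc Mc rest else []

-- the 'while frontier:' saturation loop; fuel only makes it structural
def pvSat (cells : List (Int × Int)) :
    Nat → List (Int × Int) → List (Int × Int) → List (Int × Int)
  | 0, comp, _ => comp
  | _ + 1, comp, [] => comp
  | fuel + 1, comp, frontier =>
      pvSat cells fuel (comp ++ frontier) (pvNear cells (comp ++ frontier))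

-- the bounding-box accumulator loop 'for (r,c) in comp: mr=min(mr,r); ...'
def pvBox (comp : List (Int × Int)) (b : Int × Int × Int × Int) : Int × Int × Int × Int :=
  comp.foldl (fun a p => (min a.1 p.1, max a.2.1 p.1, min a.2.2.1 p.2, max a.2.2.2 p.2)) b

-- 'for r in rows: for c in range(mc, Mc+1): fills.add((r, c))'
def pvAddRows (mc Mc : Int) (fills : PySem.Set (Int × Int)) (rows : List Int) :
    PySem.Set (Int × Int) :=
  rows.foldl (fun f r =>
    (PySem.List.pyRange mc (Mc + 1) 1).foldl (fun f c => PySem.Set.add f (r, c)) f) fills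

-- the 'for cell in cells:' loop
def pvScanB (R : Int) (cells : List (Int × Int)) :
    List (Int × Int) → PySem.Set (Int × Int) → PySem.Set (Int × Int) → PySem.Set (Int × Int)
  | [], _, fills => fills
  | cell :: rest, seen, fills =>
    if PySem.Set.contains seen cell then pvScanB R cells rest seen fills
    else
      let comp := pvSat cells (cells.length + 1) [cell] (pvNear cells [cell])
      let seen' := PySem.Set.union seen (PySem.Set.ofList comp)
      let b := pvBox comp (cell.1, cell.1, cell.2, cell.2)
      let rows := pvGrow cells b.2.2.1 b.2.2.2 (PySem.List.pyRange (b.2.1 + 1) R 1) ++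
                  pvGrow cells b.2.2.1 b.2.2.2 (PySem.List.pyRange (b.1 - 1) (-1) (-1))
      pvScanB R cells rest seen' (pvAddRows b.2.2.1 b.2.2.2 fills rows)

def solve_fcc82909_alt (grid : List (List Int)) : List (List Int) :=
  let R : Int := PySem.List.len grid
  let C : Int := PySem.List.len (PySem.List.pyGetD grid 0 [])
  let cells := pvCellsOf grid C
  let fills := pvScanB R cells cells PySem.Set.empty PySem.Set.empty
  grid.mapIdx (fun r row => row.mapIdx (fun c v =>
    if PySem.Set.contains fills ((r : Int), (c : Int)) then 3 else v))

-- ===== PRECONDITION & SPEC =====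

-- Pre_ excludes the empty grid and grids having a row shorter than the first row
-- (with that row nonempty): on exactly those inputs A raises IndexError.
def Pre_solve_fcc82909 (grid : List (List Int)) : Prop :=
  grid ≠ [] ∧ ∀ row ∈ grid, (grid.headD []).length ≤ row.length

instance (grid : List (List Int)) : Decidable (Pre_solve_fcc82909 grid) := by
  unfold Pre_solve_fcc82909; infer_instance

def pvWitness_solve_fcc82909 : List (List Int) := [[0, 5, 5], [0, 5, 5], [0, 0, 0]]

def Spec_solve_fcc82909 (grid : List (List Int)) (out : List (List Int)) : Prop :=
  out = solve_fcc82909_alt grid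
instance (grid : List (List Int)) (out : List (List Int)) :
    Decidable (Spec_solve_fcc82909 grid out) := by unfold Spec_solve_fcc82909; infer_instance

-- ===== CLAIM (what is proved, stated in full; the proofs are below) =====
def Claim_equal_solve_fcc82909 : Prop := ∀ (grid : List (List Int)),
  Dom_solve_fcc82909 grid → Pre_solve_fcc82909 grid →
  Spec_solve_fcc82909 grid (solve_fcc82909 grid)

-- ===== LEMMAS AND PROOFS =====

def inbP (grid : List (List Int)) (p : Int × Int) : Prop :=
  0 ≤ p.1 ∧ p.1 < (grid.length : Int) ∧ 0 ≤ p.2 ∧ p.2 < ((grid.headD []).length : Int)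

def nzP (grid : List (List Int)) (p : Int × Int) : Prop :=
  inbP grid p ∧ pvGv grid p.1 p.2 ≠ 0

def adjP (grid : List (List Int)) (p q : Int × Int) : Prop :=
  nzP grid p ∧ nzP grid q ∧ ∃ d ∈ pvDirs, q.1 = p.1 + d.1 ∧ q.2 = p.2 + d.2

def ReachP (grid : List (List Int)) (z p : Int × Int) : Prop :=
  Relation.ReflTransGen (adjP grid) z p

lemma adj_symm (grid : List (List Int)) {p q : Int × Int} (h : adjP grid p q) : adjP grid q p := by
  obtain ⟨hp, hq, d, hd, h1, h2⟩ := h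
  refine ⟨hq, hp, (-d.1, -d.2), ?_, by omega, by omega⟩
  simp [pvDirs] at hd ⊢
  rcases hd with h|h|h|h <;> simp [h]

lemma reach_nz (grid : List (List Int)) {z p : Int × Int} (hz : nzP grid z)
    (h : ReachP grid z p) : nzP grid p := by
  induction h with
  | refl => exact hz
  | tail _ h2 ih => exact h2.2.1

lemma reach_congr (grid : List (List Int)) {z z' : Int × Int} (h : ReachP grid z z')
    (p : Int × Int) : ReachP grid z p ↔ ReachP grid z' p := by
  have hsym : Relation.ReflTransGen (adjP grid) z' z :=
    (Relation.ReflTransGen.symmetric (fun _ _ hab => adj_symm grid hab)) h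
  exact ⟨fun hp => hsym.trans hp, fun hp => h.trans hp⟩

def IsBox (grid : List (List Int)) (z : Int × Int) (mr Mr mc Mc : Int) : Prop :=
  ((∃ q, ReachP grid z q ∧ q.1 = mr) ∧ ∀ q, ReachP grid z q → mr ≤ q.1) ∧
  ((∃ q, ReachP grid z q ∧ q.1 = Mr) ∧ ∀ q, ReachP grid z q → q.1 ≤ Mr) ∧
  ((∃ q, ReachP grid z q ∧ q.2 = mc) ∧ ∀ q, ReachP grid z q → mc ≤ q.2) ∧
  ((∃ q, ReachP grid z q ∧ q.2 = Mc) ∧ ∀ q, ReachP grid z q → q.2 ≤ Mc)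

lemma isBox_unique (grid : List (List Int)) {z : Int × Int} {a1 b1 c1 d1 a2 b2 c2 d2 : Int}
    (h1 : IsBox grid z a1 b1 c1 d1) (h2 : IsBox grid z a2 b2 c2 d2) :
    a1 = a2 ∧ b1 = b2 ∧ c1 = c2 ∧ d1 = d2 := by
  obtain ⟨⟨⟨q1, hq1, e1⟩, l1⟩, ⟨⟨q2, hq2, e2⟩, l2⟩, ⟨⟨q3, hq3, e3⟩, l3⟩, ⟨q4, hq4, e4⟩, l4⟩ := h1
  obtain ⟨⟨⟨p1, hp1, f1⟩, m1⟩, ⟨⟨p2, hp2, f2⟩, m2⟩, ⟨⟨p3, hp3, f3⟩, m3⟩, ⟨p4, hp4, f4⟩, m4⟩ := h2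
  have := l1 p1 hp1; have := m1 q1 hq1
  have := l2 p2 hp2; have := m2 q2 hq2
  have := l3 p3 hp3; have := m3 q3 hq3
  have := l4 p4 hp4; have := m4 q4 hq4
  omega

lemma isBox_congr (grid : List (List Int)) {z z' : Int × Int} (h : ReachP grid z z')
    {mr Mr mc Mc : Int} (hb : IsBox grid z' mr Mr mc Mc) : IsBox grid z mr Mr mc Mc := by
  obtain ⟨⟨⟨q1, hq1, e1⟩, l1⟩, ⟨⟨q2, hq2, e2⟩, l2⟩, ⟨⟨q3, hq3, e3⟩, l3⟩, ⟨q4, hq4, e4⟩, l4⟩ := hb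
  refine ⟨⟨⟨q1, ?_, e1⟩, fun q hq => l1 q ?_⟩, ⟨⟨q2, ?_, e2⟩, fun q hq => l2 q ?_⟩,
    ⟨⟨q3, ?_, e3⟩, fun q hq => l3 q ?_⟩, ⟨⟨q4, ?_, e4⟩, fun q hq => l4 q ?_⟩⟩ <;>
    first
      | exact (reach_congr grid h _).mpr ‹_›
      | exact (reach_congr grid h _).mp ‹_›

def pvNonzeroL (grid : List (List Int)) : List (Int × Int) :=
  (PySem.List.pyRange 0 (PySem.List.len grid) 1).flatMap (fun r =>
    ((PySem.List.pyRange 0 (PySem.List.len (PySem.List.pyGetD grid 0 [])) 1).filter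
      (fun c => !(pvGv grid r c == 0))).map (fun c => (r, c)))

lemma mem_nonzero (grid : List (List Int)) (p : Int × Int) :
    p ∈ pvNonzeroL grid ↔ nzP grid p := by
  obtain ⟨r, c⟩ := p
  simp [pvNonzeroL, nzP, inbP, PySem.List.mem_pyRange_one, PySem.List.len_eq,
    PySem.List.pyGetD_zero, List.mem_flatMap, List.mem_filter, List.mem_map]
  rw [List.head?_eq_getElem?]
  tauto

lemma nodup_nonzero (grid : List (List Int)) : (pvNonzeroL grid).Nodup := by
  rw [pvNonzeroL, List.nodup_flatMap]
  constructor
  · intro r _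
    exact List.Nodup.map (fun a b h => by simpa using congrArg Prod.snd h)
      ((PySem.List.nodup_pyRange_one _ _).filter _)
  · refine (PySem.List.nodup_pyRange_one _ _).imp ?_
    intro a b hne x hx hy
    simp only [List.mem_map, List.mem_filter] at hx hy
    obtain ⟨c1, _, rfl⟩ := hx
    obtain ⟨c2, _, h⟩ := hy
    exact absurd (congrArg Prod.fst h).symm hne

lemma len_nonzero_le (grid : List (List Int)) :
    (pvNonzeroL grid).length ≤ grid.length * (grid.headD []).length := by
  rw [pvNonzeroL, List.length_flatMap]
  calc ((PySem.List.pyRange 0 (PySem.List.len grid) 1).map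
      (fun r => (((PySem.List.pyRange 0 (PySem.List.len (PySem.List.pyGetD grid 0 [])) 1).filter
        (fun c => !(pvGv grid r c == 0))).map (fun c => (r, c))).length)).sum
      ≤ ((PySem.List.pyRange 0 (PySem.List.len grid) 1).map
        (fun _ => (grid.headD []).length)).sum := by
        apply List.sum_le_sum
        intro r _
        simp only [List.length_map]
        calc _ ≤ (PySem.List.pyRange 0 (PySem.List.len (PySem.List.pyGetD grid 0 [])) 1).length :=
              List.length_filter_le _ _
          _ = (grid.headD []).length := by
              simp [PySem.List.length_pyRange_one, PySem.List.len_eq, PySem.List.pyGetD_zero,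
                List.getD, List.head?_eq_getElem?]
    _ = grid.length * (grid.headD []).length := by
        rw [List.map_const', List.sum_replicate, PySem.List.length_pyRange_one,
          PySem.List.len_eq]
        simp [smul_eq_mul]

def triF (grid : List (List Int)) (p : Int × Int) : Int × Int × Int :=
  (p.1, p.2, pvGv grid p.1 p.2)

def BlockOf (grid : List (List Int)) (z : Int × Int) (b : List (Int × Int × Int)) : Prop :=
  ∀ t, t ∈ b ↔ ∃ p, ReachP grid z p ∧ t = triF grid p

lemma block_ne_nil (grid : List (List Int)) {z : Int × Int} {b : List (Int × Int × Int)}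
    (hz : nzP grid z) (hb : BlockOf grid z b) : b ≠ [] := by
  intro h
  subst h
  exact absurd ((hb (triF grid z)).mpr ⟨z, Relation.ReflTransGen.refl, rfl⟩) (by simp)

lemma block_box (grid : List (List Int)) {z : Int × Int} {b : List (Int × Int × Int)}
    (hz : nzP grid z) (hb : BlockOf grid z b) {mr Mr mc Mc : Int}
    (h1 : PySem.List.min? (b.map (fun t => t.1)) (fun x => x) = some mr)
    (h2 : PySem.List.max? (b.map (fun t => t.1)) (fun x => x) = some Mr)
    (h3 : PySem.List.min? (b.map (fun t => t.2.1)) (fun x => x) = some mc)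
    (h4 : PySem.List.max? (b.map (fun t => t.2.1)) (fun x => x) = some Mc) :
    IsBox grid z mr Mr mc Mc := by
  have memr : ∀ x : Int, x ∈ b.map (fun t => t.1) ↔ ∃ q, ReachP grid z q ∧ q.1 = x := by
    intro x
    simp only [List.mem_map]
    constructor
    · rintro ⟨t, ht, rfl⟩
      obtain ⟨p, hp, rfl⟩ := (hb t).mp ht
      exact ⟨p, hp, rfl⟩
    · rintro ⟨q, hq, rfl⟩
      exact ⟨triF grid q, (hb _).mpr ⟨q, hq, rfl⟩, rfl⟩
  have memc : ∀ x : Int, x ∈ b.map (fun t => t.2.1) ↔ ∃ q, ReachP grid z q ∧ q.2 = x := by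
    intro x
    simp only [List.mem_map]
    constructor
    · rintro ⟨t, ht, rfl⟩
      obtain ⟨p, hp, rfl⟩ := (hb t).mp ht
      exact ⟨p, hp, rfl⟩
    · rintro ⟨q, hq, rfl⟩
      exact ⟨triF grid q, (hb _).mpr ⟨q, hq, rfl⟩, rfl⟩
  refine ⟨⟨(memr mr).mp (PySem.List.min?_mem h1), fun q hq => ?_⟩,
    ⟨(memr Mr).mp (PySem.List.max?_mem h2), fun q hq => ?_⟩,
    ⟨(memc mc).mp (PySem.List.min?_mem h3), fun q hq => ?_⟩,
    ⟨(memc Mc).mp (PySem.List.max?_mem h4), fun q hq => ?_⟩⟩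
  · simpa using PySem.List.min?_isMin h1 q.1 ((memr q.1).mpr ⟨q, hq, rfl⟩)
  · simpa using PySem.List.max?_isMax h2 q.1 ((memr q.1).mpr ⟨q, hq, rfl⟩)
  · simpa using PySem.List.min?_isMin h3 q.2 ((memc q.2).mpr ⟨q, hq, rfl⟩)
  · simpa using PySem.List.max?_isMax h4 q.2 ((memc q.2).mpr ⟨q, hq, rfl⟩)

lemma isBox_bounds (grid : List (List Int)) {z : Int × Int} {mr Mr mc Mc : Int}
    (hz : nzP grid z) (hb : IsBox grid z mr Mr mc Mc) :
    0 ≤ mr ∧ mr ≤ Mr ∧ Mr < (grid.length : Int) ∧ 0 ≤ mc ∧ mc ≤ Mc ∧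
      Mc < ((grid.headD []).length : Int) := by
  obtain ⟨⟨⟨q1, hq1, e1⟩, l1⟩, ⟨⟨q2, hq2, e2⟩, l2⟩, ⟨⟨q3, hq3, e3⟩, l3⟩, ⟨q4, hq4, e4⟩, l4⟩ := hb
  have n1 := (reach_nz grid hz hq1).1
  have n2 := (reach_nz grid hz hq2).1
  have n3 := (reach_nz grid hz hq3).1
  have n4 := (reach_nz grid hz hq4).1
  have hzz := l1 z Relation.ReflTransGen.refl
  have := l2 q1 hq1
  have := l4 q3 hq3
  unfold inbP at n1 n2 n3 n4
  omega

def StepV (grid : List (List Int)) (V : List (Int × Int)) (a b : Int × Int) : Prop :=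
  adjP grid a b ∧ b ∉ V

def ARP (grid : List (List Int)) (V : List (Int × Int)) (stack : List (Int × Int))
    (p : Int × Int) : Prop :=
  ∃ s ∈ stack, s ∉ V ∧ nzP grid s ∧ Relation.ReflTransGen (StepV grid V) s p

lemma pathEnd_notmem (grid : List (List Int)) {V : List (Int × Int)} {s p : Int × Int}
    (hs : s ∉ V) (h : Relation.ReflTransGen (StepV grid V) s p) : p ∉ V := by
  induction h with
  | refl => exact hs
  | tail _ h2 _ => exact h2.2

lemma stepV_mono (grid : List (List Int)) {V : List (Int × Int)} {x s p : Int × Int}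
    (h : Relation.ReflTransGen (StepV grid (V ++ [x])) s p) :
    Relation.ReflTransGen (StepV grid V) s p := by
  refine Relation.ReflTransGen.mono ?_ h
  rintro a b ⟨h1, h2⟩
  exact ⟨h1, fun hb => h2 (by simp [hb])⟩

lemma pathCases (grid : List (List Int)) {V : List (Int × Int)} {x s p : Int × Int}
    (h : Relation.ReflTransGen (StepV grid V) s p) :
    Relation.ReflTransGen (StepV grid (V ++ [x])) s p ∨
      Relation.ReflTransGen (StepV grid V) x p := by
  induction h with
  | refl => exact Or.inl Relation.ReflTransGen.refl
  | tail h1 h2 ih =>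
    rename_i b c
    by_cases hcx : c = x
    · exact Or.inr (hcx ▸ Relation.ReflTransGen.refl)
    · rcases ih with ih | ih
      · exact Or.inl (ih.tail ⟨h2.1, by simp [h2.2, hcx]⟩)
      · exact Or.inr (ih.tail h2)

lemma pathDecomp (grid : List (List Int)) {V : List (Int × Int)} {x p : Int × Int}
    (hx : x ∉ V) (h : Relation.ReflTransGen (StepV grid V) x p) :
    p = x ∨ (∃ n, adjP grid x n ∧ n ∉ V ∧ n ≠ x ∧
      Relation.ReflTransGen (StepV grid (V ++ [x])) n p ∧ p ≠ x) := by
  induction h with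
  | refl => exact Or.inl rfl
  | tail h1 h2 ih =>
    rename_i b c
    by_cases hcx : c = x
    · exact Or.inl hcx
    · rcases ih with rfl | ⟨n, hn1, hn2, hn3, hn4, hn5⟩
      · exact Or.inr ⟨c, h2.1, h2.2, hcx, Relation.ReflTransGen.refl, hcx⟩
      · exact Or.inr ⟨n, hn1, hn2, hn3, hn4.tail ⟨h2.1, by simp [h2.2, hcx]⟩, hcx⟩

lemma AR_visit (grid : List (List Int)) {x : Int × Int} {V stack' stack : List (Int × Int)}
    (hxV : x ∉ V) (hx : nzP grid x)
    (hstk : ∀ q, q ∈ stack' ↔ q ∈ stack ∨ (adjP grid x q ∧ q ∉ V ∧ q ≠ x)) (p : Int × Int) :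
    (p = x ∨ (p ∉ V ++ [x] ∧ ARP grid (V ++ [x]) stack' p)) ↔
      (p ∉ V ∧ ARP grid V (x :: stack) p) := by
  constructor
  · rintro (rfl | ⟨hpV, s, hs, hsV, hnzs, hpath⟩)
    · exact ⟨hxV, p, by simp, hxV, hx, Relation.ReflTransGen.refl⟩
    · have hpV' : p ∉ V := fun h => hpV (by simp [h])
      rcases (hstk s).mp hs with hs' | ⟨hadj, hsV0, hsx⟩
      · exact ⟨hpV', s, by simp [hs'], fun h => hsV (by simp [h]), hnzs,
          stepV_mono grid hpath⟩
      · refine ⟨hpV', x, by simp, hxV, hx, ?_⟩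
        exact Relation.ReflTransGen.head ⟨hadj, hsV0⟩ (stepV_mono grid hpath)
  · rintro ⟨hpV, s, hs, hsV, hnzs, hpath⟩
    by_cases hpx : p = x
    · exact Or.inl hpx
    right
    have hpVx : p ∉ V ++ [x] := by simp [hpV, hpx]
    refine ⟨hpVx, ?_⟩
    by_cases hsx : s = x
    · subst hsx
      rcases pathDecomp grid hsV hpath with rfl | ⟨n, hn1, hn2, hn3, hn4, _⟩
      · exact absurd rfl hpx
      · exact ⟨n, (hstk n).mpr (Or.inr ⟨hn1, hn2, hn3⟩), by simp [hn2, hn3],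
          hn1.2.1, hn4⟩
    · have hs' : s ∈ stack := by
        rcases List.mem_cons.mp hs with h | h
        · exact absurd h hsx
        · exact h
      rcases pathCases grid (x := x) hpath with h | h
      · exact ⟨s, (hstk s).mpr (Or.inl hs'), by simp [hsV, hsx], hnzs, h⟩
      · rcases pathDecomp grid hxV h with rfl | ⟨n, hn1, hn2, hn3, hn4, _⟩
        · exact absurd rfl hpx
        · exact ⟨n, (hstk n).mpr (Or.inr ⟨hn1, hn2, hn3⟩), by simp [hn2, hn3],
            hn1.2.1, hn4⟩

lemma AR_seed (grid : List (List Int)) {V : List (Int × Int)} {z : Int × Int}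
    (hcl : ∀ a b, a ∈ V → adjP grid a b → b ∈ V) (hzV : z ∉ V) (hz : nzP grid z)
    (p : Int × Int) : (p ∉ V ∧ ARP grid V [z] p) ↔ ReachP grid z p := by
  constructor
  · rintro ⟨hpV, s, hs, hsV, hnzs, hpath⟩
    simp at hs
    subst hs
    exact Relation.ReflTransGen.mono (fun a b h => h.1) hpath
  · intro h
    have hpath : Relation.ReflTransGen (StepV grid V) z p := by
      induction h with
      | refl => exact Relation.ReflTransGen.refl
      | tail h1 h2 ih =>
        rename_i b c
        have hbV : b ∉ V := pathEnd_notmem grid hzV ih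
        have hcV : c ∉ V := fun hc => hbV (hcl c b hc (adj_symm grid h2))
        exact ih.tail ⟨h2, hcV⟩
    exact ⟨pathEnd_notmem grid hzV hpath, z, by simp, hzV, hz, hpath⟩

lemma mem_foldl_push {α β : Type} (l : List β) (P : β → Bool) (g : β → α)
    (stack : List α) (q : α) :
    q ∈ l.foldl (fun st d => if P d then g d :: st else st) stack ↔
      q ∈ stack ∨ ∃ d ∈ l, P d ∧ q = g d := by
  induction l generalizing stack with
  | nil => simp
  | cons d l ih =>
    simp only [List.foldl_cons]
    by_cases hd : P d
    · simp only [hd, if_pos, ih, List.mem_cons]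
      constructor
      · rintro ((rfl | h) | ⟨d', hd', h1, h2⟩)
        · exact Or.inr ⟨d, Or.inl rfl, hd, rfl⟩
        · exact Or.inl h
        · exact Or.inr ⟨d', Or.inr hd', h1, h2⟩
      · rintro (h | ⟨d', hd', h1, h2⟩)
        · exact Or.inl (Or.inr h)
        · rcases hd' with rfl | hd''
          · exact Or.inl (Or.inl h2)
          · exact Or.inr ⟨d', hd'', h1, h2⟩
    · simp only [hd, if_neg, Bool.false_eq_true, not_false_iff, ih]
      constructor
      · rintro (h | ⟨d', hd', h1, h2⟩)
        · exact Or.inl h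
        · exact Or.inr ⟨d', List.mem_cons_of_mem _ hd', h1, h2⟩
      · rintro (h | ⟨d', hd', h1, h2⟩)
        · exact Or.inl h
        · rcases List.mem_cons.mp hd' with rfl | hd''
          · exact absurd h1 hd
          · exact Or.inr ⟨d', hd'', h1, h2⟩

lemma len_foldl_push {α β : Type} (l : List β) (P : β → Bool) (g : β → α)
    (stack : List α) :
    (l.foldl (fun st d => if P d then g d :: st else st) stack).length ≤
      stack.length + l.length := by
  induction l generalizing stack with
  | nil => simp
  | cons d l ih =>
    simp only [List.foldl_cons, List.length_cons]
    by_cases hd : P d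
    · simp only [hd, if_pos]
      calc _ ≤ (g d :: stack).length + l.length := ih _
        _ = stack.length + (l.length + 1) := by simp; omega
    · simp only [hd]
      calc _ ≤ stack.length + l.length := ih _
        _ ≤ stack.length + (l.length + 1) := by omega

lemma dfs_spec (grid : List (List Int)) : ∀ (fuel : Nat) (visited : PySem.Set (Int × Int))
    (comp : List (Int × Int × Int)) (stack : List (Int × Int)),
    (∀ p ∈ stack, inbP grid p) →
    5 * ((pvNonzeroL grid).filter (fun q => !(PySem.Set.contains visited q))).length +
        stack.length + 1 ≤ fuel →
    ∃ Δ : List (Int × Int),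
      pvDfs grid (PySem.List.len grid) (PySem.List.len (PySem.List.pyGetD grid 0 []))
          fuel visited comp stack =
        (visited ++ Δ, comp ++ Δ.map (triF grid)) ∧
      ∀ p, p ∈ Δ ↔ (p ∉ visited ∧ ARP grid visited stack p) := by
  intro fuel
  induction fuel with
  | zero => intro visited comp stack hst hfuel; omega
  | succ fuel ih =>
    intro visited comp stack hst hfuel
    match stack, hst with
    | [], _ =>
      refine ⟨[], by simp [pvDfs], fun p => ?_⟩
      simp [ARP]
    | (cr, cc) :: stack, hst =>
      by_cases hskip : (PySem.Set.contains visited (cr, cc) || pvGv grid cr cc == 0) = true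
      · -- skip branch
        have step : pvDfs grid (PySem.List.len grid)
            (PySem.List.len (PySem.List.pyGetD grid 0 [])) (fuel + 1) visited comp
            ((cr, cc) :: stack) =
            pvDfs grid (PySem.List.len grid) (PySem.List.len (PySem.List.pyGetD grid 0 []))
              fuel visited comp stack := by
          rw [pvDfs, if_pos hskip]
        obtain ⟨Δ, hres, hmem⟩ := ih visited comp stack
          (fun p hp => hst p (List.mem_cons_of_mem _ hp)) (by simp at hfuel ⊢; omega)
        refine ⟨Δ, by rw [step, hres], fun p => ?_⟩
        rw [hmem p]
        constructor
        · rintro ⟨h1, s, hs, h3, h4, h5⟩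
          exact ⟨h1, s, List.mem_cons_of_mem _ hs, h3, h4, h5⟩
        · rintro ⟨h1, s, hs, h3, h4, h5⟩
          rcases List.mem_cons.mp hs with rfl | hs'
          · -- s is the popped cell: contradicts skip condition
            simp only [Bool.or_eq_true, beq_iff_eq] at hskip
            rcases hskip with hc | hc
            · exact absurd ((PySem.Set.contains_iff _ _).mp hc) h3
            · exact absurd hc h4.2
          · exact ⟨h1, s, hs', h3, h4, h5⟩
      · -- visit branch
        have hcv : (cr, cc) ∉ visited := by
          intro h
          apply hskip
          simp only [Bool.or_eq_true]
          exact Or.inl ((PySem.Set.contains_iff visited (cr, cc)).mpr h)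
        have hgv : pvGv grid cr cc ≠ 0 := by
          intro h
          exact hskip (by simp [h])
        have hx : nzP grid (cr, cc) := ⟨hst _ List.mem_cons_self, hgv⟩
        have hadd : PySem.Set.add visited (cr, cc) = visited ++ [(cr, cc)] :=
          PySem.Set.add_of_not_mem hcv
        have step : pvDfs grid (PySem.List.len grid)
            (PySem.List.len (PySem.List.pyGetD grid 0 [])) (fuel + 1) visited comp
            ((cr, cc) :: stack) =
            pvDfs grid (PySem.List.len grid) (PySem.List.len (PySem.List.pyGetD grid 0 []))
              fuel (PySem.Set.add visited (cr, cc)) (comp ++ [(cr, cc, pvGv grid cr cc)])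
              (pvDirs.foldl (fun st d =>
                if decide (0 ≤ cr + d.1) && decide (cr + d.1 < PySem.List.len grid) &&
                    decide (0 ≤ cc + d.2) &&
                    decide (cc + d.2 < PySem.List.len (PySem.List.pyGetD grid 0 [])) &&
                    !(PySem.Set.contains (PySem.Set.add visited (cr, cc)) (cr + d.1, cc + d.2)) &&
                    !(pvGv grid (cr + d.1) (cc + d.2) == 0)
                then (cr + d.1, cc + d.2) :: st else st) stack) := by
          rw [pvDfs, if_neg hskip]
        set stack' := pvDirs.foldl (fun st d =>
          if decide (0 ≤ cr + d.1) && decide (cr + d.1 < PySem.List.len grid) &&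
              decide (0 ≤ cc + d.2) &&
              decide (cc + d.2 < PySem.List.len (PySem.List.pyGetD grid 0 [])) &&
              !(PySem.Set.contains (PySem.Set.add visited (cr, cc)) (cr + d.1, cc + d.2)) &&
              !(pvGv grid (cr + d.1) (cc + d.2) == 0)
          then (cr + d.1, cc + d.2) :: st else st) stack with hstack'
        have hstk : ∀ q, q ∈ stack' ↔ q ∈ stack ∨
            (adjP grid (cr, cc) q ∧ q ∉ visited ∧ q ≠ (cr, cc)) := by
          intro q
          rw [hstack', mem_foldl_push]
          constructor
          · rintro (h | ⟨d, hd, hP, rfl⟩)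
            · exact Or.inl h
            · simp only [Bool.and_eq_true, decide_eq_true_eq, Bool.not_eq_true',
                beq_eq_false_iff_ne] at hP
              obtain ⟨⟨⟨⟨⟨hb1, hb2⟩, hb3⟩, hb4⟩, hnm⟩, hnz⟩ := hP
              have hnm' : (cr + d.1, cc + d.2) ∉ visited ∧ (cr + d.1, cc + d.2) ≠ (cr, cc) := by
                have := (PySem.Set.contains_iff (PySem.Set.add visited (cr, cc))
                  (cr + d.1, cc + d.2))
                rw [hadd] at this
                constructor
                · intro hmm
                  exact absurd (this.mpr (by simp [hmm])) (by simpa using hnm)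
                · intro hmm
                  exact absurd (this.mpr (by simp [hmm])) (by simpa using hnm)
              refine Or.inr ⟨⟨hx, ⟨?_, hnz⟩, d, hd, rfl, rfl⟩, hnm'.1, hnm'.2⟩
              exact ⟨by simpa using hb1, by simpa [PySem.List.len_eq] using hb2,
                by simpa using hb3, by simpa [PySem.List.len_eq, PySem.List.pyGetD_zero,
                  List.getD, List.head?_eq_getElem?] using hb4⟩
          · rintro (h | ⟨⟨_, ⟨hinb, hnz⟩, d, hd, he1, he2⟩, hnm, hne⟩)
            · exact Or.inl h
            · refine Or.inr ⟨d, hd, ?_, by rw [Prod.ext_iff]; exact ⟨he1, he2⟩⟩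
              have hq : q = (cr + d.1, cc + d.2) := by rw [Prod.ext_iff]; exact ⟨he1, he2⟩
              subst hq
              simp only [Bool.and_eq_true, decide_eq_true_eq, Bool.not_eq_true',
                beq_eq_false_iff_ne]
              unfold inbP at hinb
              refine ⟨⟨⟨⟨⟨by simpa using hinb.1, ?_⟩, by simpa using hinb.2.2.1⟩, ?_⟩, ?_⟩, hnz⟩
              · simpa [PySem.List.len_eq] using hinb.2.1
              · simpa [PySem.List.len_eq, PySem.List.pyGetD_zero, List.getD,
                  List.head?_eq_getElem?] using hinb.2.2.2
              · have hno : ¬ (PySem.Set.add visited (cr, cc)).contains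
                    (cr + d.1, cc + d.2) = true := by
                  intro hcon
                  rcases List.mem_append.mp (hadd ▸ (PySem.Set.contains_iff _ _).mp hcon)
                    with hmm | hmm
                  · exact hnm hmm
                  · exact hne (by simpa using hmm)
                simpa using hno
        have hst' : ∀ p ∈ stack', inbP grid p := by
          intro p hp
          rcases (hstk p).mp hp with h | ⟨hadj, _, _⟩
          · exact hst p (List.mem_cons_of_mem _ h)
          · exact hadj.2.1.1
        have hlen : stack'.length ≤ stack.length + 4 := by
          have := len_foldl_push pvDirs (fun d =>
            decide (0 ≤ cr + d.1) && decide (cr + d.1 < PySem.List.len grid) &&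
              decide (0 ≤ cc + d.2) &&
              decide (cc + d.2 < PySem.List.len (PySem.List.pyGetD grid 0 [])) &&
              !(PySem.Set.contains (PySem.Set.add visited (cr, cc)) (cr + d.1, cc + d.2)) &&
              !(pvGv grid (cr + d.1) (cc + d.2) == 0))
            (fun d => (cr + d.1, cc + d.2)) stack
          rw [hstack']
          exact this
        have hfilter : ((pvNonzeroL grid).filter
              (fun q => !(PySem.Set.contains (PySem.Set.add visited (cr, cc)) q))).length + 1 =
            ((pvNonzeroL grid).filter (fun q => !(PySem.Set.contains visited q))).length := by
          have key : ∀ (s : PySem.Set (Int × Int)) x,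
              (PySem.Set.contains s x = false) ↔ x ∉ s := by
            intro s x
            rw [← Bool.not_eq_true]
            exact not_congr (PySem.Set.contains_iff s x)
          have hcong : (pvNonzeroL grid).filter
              (fun q => !(PySem.Set.contains (PySem.Set.add visited (cr, cc)) q)) =
              ((pvNonzeroL grid).filter (fun q => !(PySem.Set.contains visited q))).filter
                (fun q => q != (cr, cc)) := by
            rw [List.filter_filter]
            apply List.filter_congr
            intro q _
            rw [hadd, Bool.eq_iff_iff]
            simp only [Bool.not_eq_true', Bool.and_eq_true, bne_iff_ne, key,
              List.mem_append, List.mem_singleton]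
            tauto
          rw [hcong]
          have hxin : (cr, cc) ∈ (pvNonzeroL grid).filter
              (fun q => !(PySem.Set.contains visited q)) := by
            rw [List.mem_filter]
            refine ⟨(mem_nonzero grid _).mpr hx, ?_⟩
            simp only [Bool.not_eq_true']
            rw [← Bool.not_eq_true]
            intro h
            exact hcv ((PySem.Set.contains_iff _ _).mp h)
          have hnd : ((pvNonzeroL grid).filter
              (fun q => !(PySem.Set.contains visited q))).Nodup :=
            (nodup_nonzero grid).filter _
          rw [← List.Nodup.erase_eq_filter hnd, List.length_erase_of_mem hxin]
          have : 0 < ((pvNonzeroL grid).filter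
              (fun q => !(PySem.Set.contains visited q))).length :=
            List.length_pos_of_mem hxin
          omega
        obtain ⟨Δ', hres', hmem'⟩ := ih (PySem.Set.add visited (cr, cc))
          (comp ++ [(cr, cc, pvGv grid cr cc)]) stack' hst' (by
            simp only [List.length_cons] at hfuel
            omega)
        refine ⟨(cr, cc) :: Δ', ?_, ?_⟩
        · rw [step, hres', hadd]
          simp [triF]
        · intro p
          have := AR_visit grid (x := (cr, cc)) (V := visited) (stack' := stack')
            (stack := stack) hcv hx hstk p
          rw [List.mem_cons, hmem' p, hadd]
          exact this

-- ---------- B-side lemmas ----------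

lemma manh_iff (p q : Int × Int) :
    (p.1 - q.1).natAbs + (p.2 - q.2).natAbs = 1 ↔
      ∃ d ∈ pvDirs, p.1 = q.1 + d.1 ∧ p.2 = q.2 + d.2 := by
  constructor
  · intro h
    have h4 : (p.1 = q.1 - 1 ∧ p.2 = q.2) ∨ (p.1 = q.1 + 1 ∧ p.2 = q.2) ∨
        (p.1 = q.1 ∧ p.2 = q.2 - 1) ∨ (p.1 = q.1 ∧ p.2 = q.2 + 1) := by omega
    rcases h4 with ⟨h1, h2⟩ | ⟨h1, h2⟩ | ⟨h1, h2⟩ | ⟨h1, h2⟩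
    · exact ⟨(-1, 0), by simp [pvDirs], by omega, by omega⟩
    · exact ⟨(1, 0), by simp [pvDirs], by omega, by omega⟩
    · exact ⟨(0, -1), by simp [pvDirs], by omega, by omega⟩
    · exact ⟨(0, 1), by simp [pvDirs], by omega, by omega⟩
  · rintro ⟨d, hd, h1, h2⟩
    obtain ⟨d1, d2⟩ := d
    simp [pvDirs, Prod.ext_iff] at hd
    rcases hd with ⟨e1, e2⟩ | ⟨e1, e2⟩ | ⟨e1, e2⟩ | ⟨e1, e2⟩ <;>
      (subst e1; subst e2; simp at h1 h2; omega)

lemma mem_near (cells S : List (Int × Int)) (p : Int × Int) :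
    p ∈ pvNear cells S ↔
      p ∈ cells ∧ p ∉ S ∧ ∃ q ∈ S, (p.1 - q.1).natAbs + (p.2 - q.2).natAbs = 1 := by
  simp [pvNear, List.mem_filter, List.any_eq_true]

lemma near_char (grid : List (List Int)) {S : List (Int × Int)}
    (hS : ∀ q ∈ S, nzP grid q) (p : Int × Int) :
    p ∈ pvNear (pvNonzeroL grid) S ↔ p ∉ S ∧ ∃ q ∈ S, adjP grid q p := by
  rw [mem_near, mem_nonzero]
  constructor
  · rintro ⟨hnz, hns, q, hq, hm⟩
    obtain ⟨d, hd, h1, h2⟩ := (manh_iff p q).mp hm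
    exact ⟨hns, q, hq, hS q hq, hnz, d, hd, h1, h2⟩
  · rintro ⟨hns, q, hq, _, hnz, d, hd, h1, h2⟩
    exact ⟨hnz, hns, q, hq, (manh_iff p q).mpr ⟨d, hd, h1, h2⟩⟩

lemma nodup_near (grid : List (List Int)) (S : List (Int × Int)) :
    (pvNear (pvNonzeroL grid) S).Nodup := (nodup_nonzero grid).filter _

lemma sat_spec (grid : List (List Int)) {z : Int × Int} (hz : nzP grid z) :
    ∀ (fuel : Nat) (comp : List (Int × Int)), comp.Nodup →
    (∀ p ∈ comp, p ∈ pvNonzeroL grid) → (∀ p ∈ comp, ReachP grid z p) → z ∈ comp →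
    (pvNonzeroL grid).length + 1 ≤ fuel + comp.length →
    ∀ p, p ∈ pvSat (pvNonzeroL grid) fuel comp (pvNear (pvNonzeroL grid) comp) ↔
      ReachP grid z p := by
  intro fuel
  induction fuel with
  | zero =>
    intro comp hnd hsub _ _ hlen p
    exfalso
    have := (hnd.subperm hsub).length_le
    omega
  | succ fuel ih =>
    intro comp hnd hsub hreach hzin hlen p
    have hSnz : ∀ q ∈ comp, nzP grid q := fun q hq => (mem_nonzero grid q).mp (hsub q hq)
    cases hfr : pvNear (pvNonzeroL grid) comp with
    | nil =>
      show p ∈ comp ↔ ReachP grid z p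
      constructor
      · exact hreach p
      · intro hr
        have hclosed : ∀ a b, a ∈ comp → adjP grid a b → b ∈ comp := by
          intro a b ha hadj
          by_contra hb
          have hmem : b ∈ pvNear (pvNonzeroL grid) comp :=
            (near_char grid hSnz b).mpr ⟨hb, a, ha, hadj⟩
          rw [hfr] at hmem
          simp at hmem
        induction hr with
        | refl => exact hzin
        | tail _ h2 ih2 => exact hclosed _ _ ih2 h2
    | cons q l =>
      show p ∈ pvSat (pvNonzeroL grid) fuel (comp ++ q :: l)
          (pvNear (pvNonzeroL grid) (comp ++ q :: l)) ↔ ReachP grid z p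
      have hfmem : ∀ x, x ∈ q :: l ↔ x ∈ pvNear (pvNonzeroL grid) comp := by
        intro x; rw [hfr]
      have hfnd : (q :: l).Nodup := hfr ▸ nodup_near grid comp
      have hfnotin : ∀ x ∈ q :: l, x ∉ comp := by
        intro x hx
        exact (((near_char grid hSnz x).mp ((hfmem x).mp hx))).1
      have hfreach : ∀ x ∈ q :: l, ReachP grid z x := by
        intro x hx
        obtain ⟨_, a, ha, hadj⟩ := (near_char grid hSnz x).mp ((hfmem x).mp hx)
        exact (hreach a ha).tail hadj
      have hfsub : ∀ x ∈ q :: l, x ∈ pvNonzeroL grid := by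
        intro x hx
        exact (mem_nonzero grid x).mpr (reach_nz grid hz (hfreach x hx))
      refine ih (comp ++ q :: l) ?_ ?_ ?_ ?_ ?_ p
      · rw [List.nodup_append]
        exact ⟨hnd, hfnd, fun a ha b hb hab => hfnotin b hb (hab ▸ ha)⟩
      · intro x hx
        rcases List.mem_append.mp hx with h | h
        · exact hsub x h
        · exact hfsub x h
      · intro x hx
        rcases List.mem_append.mp hx with h | h
        · exact hreach x h
        · exact hfreach x h
      · exact List.mem_append.mpr (Or.inl hzin)
      · rw [List.length_append]
        simp only [List.length_cons]
        omega

lemma box_fold (l : List (Int × Int)) :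
    ∀ b : Int × Int × Int × Int,
      (pvBox l b).1 ≤ b.1 ∧ b.2.1 ≤ (pvBox l b).2.1 ∧
      (pvBox l b).2.2.1 ≤ b.2.2.1 ∧ b.2.2.2 ≤ (pvBox l b).2.2.2 ∧
      (∀ q ∈ l, (pvBox l b).1 ≤ q.1 ∧ q.1 ≤ (pvBox l b).2.1 ∧
        (pvBox l b).2.2.1 ≤ q.2 ∧ q.2 ≤ (pvBox l b).2.2.2) ∧
      ((pvBox l b).1 = b.1 ∨ ∃ q ∈ l, (pvBox l b).1 = q.1) ∧
      ((pvBox l b).2.1 = b.2.1 ∨ ∃ q ∈ l, (pvBox l b).2.1 = q.1) ∧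
      ((pvBox l b).2.2.1 = b.2.2.1 ∨ ∃ q ∈ l, (pvBox l b).2.2.1 = q.2) ∧
      ((pvBox l b).2.2.2 = b.2.2.2 ∨ ∃ q ∈ l, (pvBox l b).2.2.2 = q.2) := by
  induction l with
  | nil =>
    intro b
    simp [pvBox]
  | cons x xs ih =>
    intro b
    have hstep : pvBox (x :: xs) b =
        pvBox xs (min b.1 x.1, max b.2.1 x.1, min b.2.2.1 x.2, max b.2.2.2 x.2) := rfl
    obtain ⟨i1, i2, i3, i4, hall, a1, a2, a3, a4⟩ :=
      ih (min b.1 x.1, max b.2.1 x.1, min b.2.2.1 x.2, max b.2.2.2 x.2)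
    dsimp only at i1 i2 i3 i4 a1 a2 a3 a4
    rw [hstep]
    refine ⟨le_trans i1 (min_le_left _ _), le_trans (le_max_left _ _) i2,
      le_trans i3 (min_le_left _ _), le_trans (le_max_left _ _) i4, ?_, ?_, ?_, ?_, ?_⟩
    · intro q hq
      rcases List.mem_cons.mp hq with rfl | hq'
      · exact ⟨le_trans i1 (min_le_right _ _), le_trans (le_max_right _ _) i2,
          le_trans i3 (min_le_right _ _), le_trans (le_max_right _ _) i4⟩
      · exact hall q hq'
    · rcases a1 with h | ⟨q, hq, he⟩
      · rcases le_total b.1 x.1 with hle | hle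
        · exact Or.inl (by rw [h, min_eq_left hle])
        · exact Or.inr ⟨x, List.mem_cons_self, by rw [h, min_eq_right hle]⟩
      · exact Or.inr ⟨q, List.mem_cons_of_mem _ hq, he⟩
    · rcases a2 with h | ⟨q, hq, he⟩
      · rcases le_total b.2.1 x.1 with hle | hle
        · exact Or.inr ⟨x, List.mem_cons_self, by rw [h, max_eq_right hle]⟩
        · exact Or.inl (by rw [h, max_eq_left hle])
      · exact Or.inr ⟨q, List.mem_cons_of_mem _ hq, he⟩
    · rcases a3 with h | ⟨q, hq, he⟩
      · rcases le_total b.2.2.1 x.2 with hle | hle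
        · exact Or.inl (by rw [h, min_eq_left hle])
        · exact Or.inr ⟨x, List.mem_cons_self, by rw [h, min_eq_right hle]⟩
      · exact Or.inr ⟨q, List.mem_cons_of_mem _ hq, he⟩
    · rcases a4 with h | ⟨q, hq, he⟩
      · rcases le_total b.2.2.2 x.2 with hle | hle
        · exact Or.inr ⟨x, List.mem_cons_self, by rw [h, max_eq_right hle]⟩
        · exact Or.inl (by rw [h, max_eq_left hle])
      · exact Or.inr ⟨q, List.mem_cons_of_mem _ hq, he⟩

lemma box_isBox (grid : List (List Int)) {z : Int × Int} {comp : List (Int × Int)}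
    (hmem : ∀ p, p ∈ comp ↔ ReachP grid z p) :
    IsBox grid z (pvBox comp (z.1, z.1, z.2, z.2)).1 (pvBox comp (z.1, z.1, z.2, z.2)).2.1
      (pvBox comp (z.1, z.1, z.2, z.2)).2.2.1 (pvBox comp (z.1, z.1, z.2, z.2)).2.2.2 := by
  obtain ⟨i1, i2, i3, i4, hall, a1, a2, a3, a4⟩ := box_fold comp (z.1, z.1, z.2, z.2)
  dsimp only at i1 i2 i3 i4 a1 a2 a3 a4
  refine ⟨⟨?_, fun q hq => (hall q ((hmem q).mpr hq)).1⟩,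
          ⟨?_, fun q hq => (hall q ((hmem q).mpr hq)).2.1⟩,
          ⟨?_, fun q hq => (hall q ((hmem q).mpr hq)).2.2.1⟩,
          ⟨?_, fun q hq => (hall q ((hmem q).mpr hq)).2.2.2⟩⟩
  · rcases a1 with h | ⟨q, hq, he⟩
    · exact ⟨z, Relation.ReflTransGen.refl, h.symm⟩
    · exact ⟨q, (hmem q).mp hq, he.symm⟩
  · rcases a2 with h | ⟨q, hq, he⟩
    · exact ⟨z, Relation.ReflTransGen.refl, h.symm⟩
    · exact ⟨q, (hmem q).mp hq, he.symm⟩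
  · rcases a3 with h | ⟨q, hq, he⟩
    · exact ⟨z, Relation.ReflTransGen.refl, h.symm⟩
    · exact ⟨q, (hmem q).mp hq, he.symm⟩
  · rcases a4 with h | ⟨q, hq, he⟩
    · exact ⟨z, Relation.ReflTransGen.refl, h.symm⟩
    · exact ⟨q, (hmem q).mp hq, he.symm⟩

lemma blank_eq (grid : List (List Int)) {r mc Mc : Int}
    (hr : 0 ≤ r ∧ r < (grid.length : Int)) (hmc : 0 ≤ mc)
    (hMc : Mc < ((grid.headD []).length : Int)) :
    pvBlank (pvNonzeroL grid) r mc Mc = pvAllZero grid r mc Mc := by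
  rw [Bool.eq_iff_iff]
  constructor
  · intro h
    rw [pvAllZero, List.all_eq_true]
    intro c hc
    rw [PySem.List.mem_pyRange_one] at hc
    rw [beq_iff_eq]
    by_contra hne
    have hmem : (r, c) ∈ pvNonzeroL grid :=
      (mem_nonzero grid _).mpr ⟨⟨hr.1, hr.2, by omega, by omega⟩, hne⟩
    rw [pvBlank, Bool.not_eq_true', List.any_eq_false] at h
    exact h (r, c) hmem (by simp; omega)
  · intro h
    rw [pvBlank, Bool.not_eq_true', List.any_eq_false]
    intro q hq
    intro hcontr
    simp only [Bool.and_eq_true, beq_iff_eq, decide_eq_true_eq] at hcontr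
    obtain ⟨⟨h1, h2⟩, h3⟩ := hcontr
    rw [pvAllZero, List.all_eq_true] at h
    rw [mem_nonzero] at hq
    have h4 := h q.2 (PySem.List.mem_pyRange_one.mpr (by omega))
    rw [beq_iff_eq] at h4
    exact hq.2 (by rw [h1]; exact h4)

lemma grow_eq (grid : List (List Int)) {mc Mc : Int} (hmc : 0 ≤ mc)
    (hMc : Mc < ((grid.headD []).length : Int)) :
    ∀ rs : List Int, (∀ r ∈ rs, 0 ≤ r ∧ r < (grid.length : Int)) →
    pvGrow (pvNonzeroL grid) mc Mc rs = rs.takeWhile (fun r => pvAllZero grid r mc Mc) := by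
  intro rs
  induction rs with
  | nil => intro _; rfl
  | cons r rest ih =>
    intro hrs
    rw [pvGrow, List.takeWhile_cons, blank_eq grid (hrs r List.mem_cons_self) hmc hMc]
    by_cases h : pvAllZero grid r mc Mc
    · rw [if_pos h, if_pos h, ih (fun x hx => hrs x (List.mem_cons_of_mem _ hx))]
    · rw [if_neg h, if_neg h]

lemma mem_fold_add {α β : Type} [BEq α] [LawfulBEq α] (l : List β) (g : β → α)
    (f : PySem.Set α) (q : α) :
    q ∈ l.foldl (fun f c => PySem.Set.add f (g c)) f ↔ q ∈ f ∨ ∃ c ∈ l, q = g c := by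
  induction l generalizing f with
  | nil => simp
  | cons x xs ih =>
    simp only [List.foldl_cons, ih, PySem.Set.mem_add, List.mem_cons]
    constructor
    · rintro ((h | h) | ⟨c, hc, h⟩)
      · exact Or.inl h
      · exact Or.inr ⟨x, Or.inl rfl, h⟩
      · exact Or.inr ⟨c, Or.inr hc, h⟩
    · rintro (h | ⟨c, rfl | hc, h⟩)
      · exact Or.inl (Or.inl h)
      · exact Or.inl (Or.inr h)
      · exact Or.inr ⟨c, hc, h⟩

lemma addRows_char (mc Mc : Int) :
    ∀ (rows : List Int) (fills : PySem.Set (Int × Int)) (q : Int × Int),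
    q ∈ pvAddRows mc Mc fills rows ↔
      q ∈ fills ∨ (q.1 ∈ rows ∧ mc ≤ q.2 ∧ q.2 ≤ Mc) := by
  intro rows
  induction rows with
  | nil =>
    intro fills q
    simp [pvAddRows]
  | cons r rest ih =>
    intro fills q
    have hstep : pvAddRows mc Mc fills (r :: rest) =
        pvAddRows mc Mc ((PySem.List.pyRange mc (Mc + 1) 1).foldl
          (fun f c => PySem.Set.add f (r, c)) fills) rest := rfl
    rw [hstep, ih, mem_fold_add]
    constructor
    · rintro ((hf | ⟨c, hc, rfl⟩) | h)
      · exact Or.inl hf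
      · rw [PySem.List.mem_pyRange_one] at hc
        exact Or.inr ⟨by simp, by simpa using hc.1, by simp; omega⟩
      · exact Or.inr ⟨List.mem_cons_of_mem _ h.1, h.2.1, h.2.2⟩
    · rintro (hf | ⟨hm, h1, h2⟩)
      · exact Or.inl (Or.inl hf)
      · rcases List.mem_cons.mp hm with he | hm'
        · refine Or.inl (Or.inr ⟨q.2, PySem.List.mem_pyRange_one.mpr (by omega), ?_⟩)
          rw [← he]
        · exact Or.inr ⟨hm', h1, h2⟩

-- cells as enumerated by B equal A's row-major nonzero list
lemma cells_eq (grid : List (List Int)) (hpre : Pre_solve_fcc82909 grid) :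
    pvCellsOf grid (((grid.headD []).length : Nat) : Int) = pvNonzeroL grid := by
  have hC : PySem.List.len (PySem.List.pyGetD grid 0 []) =
      (((grid.headD []).length : Nat) : Int) := by
    simp [PySem.List.len_eq, PySem.List.pyGetD_zero, List.getD, List.head?_eq_getElem?]
  rw [pvCellsOf, pvNonzeroL, hC]
  rw [PySem.List.enumerate_eq_map_pyRange (d := ([] : List Int)), List.flatMap_map]
  apply List.flatMap_congr
  intro r hr
  rw [PySem.List.mem_pyRange_one, PySem.List.len_eq] at hr
  have hrow : PySem.List.pyGetD grid r [] = grid[r.toNat]'(by omega) :=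
    PySem.List.pyGetD_eq_getElem _ _ hr.1 (by omega)
  have hrowlen : (grid.headD []).length ≤ (grid[r.toNat]'(by omega)).length :=
    hpre.2 _ (List.getElem_mem (by omega))
  have hslice : PySem.List.slice (PySem.List.pyGetD grid r [])
      (none : Option Int) (some (((grid.headD []).length : Nat) : Int)) =
      (grid[r.toNat]'(by omega)).take (grid.headD []).length := by
    rw [hrow, PySem.List.slice_to_natCast]
  simp only [Function.comp_apply]
  rw [hslice, PySem.List.enumerate_eq_map_pyRange (d := (0 : Int)), List.filter_map, List.map_map]
  have hlen : PySem.List.len ((grid[r.toNat]'(by omega)).take (grid.headD []).length) =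
      (((grid.headD []).length : Nat) : Int) := by
    rw [PySem.List.len_eq]
    congr 1
    rw [List.length_take]
    omega
  rw [hlen]
  have hfil : (PySem.List.pyRange 0 (((grid.headD []).length : Nat) : Int) 1).filter
      ((fun cv : Int × Int => !(cv.2 == 0)) ∘
        (fun j => (j, PySem.List.pyGetD ((grid[r.toNat]'(by omega)).take (grid.headD []).length) j 0))) =
      (PySem.List.pyRange 0 (((grid.headD []).length : Nat) : Int) 1).filter
        (fun c => !(pvGv grid r c == 0)) := by
    apply List.filter_congr
    intro c hc
    rw [PySem.List.mem_pyRange_one] at hc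
    simp only [Function.comp_apply]
    congr 2
    have h1 : PySem.List.pyGetD ((grid[r.toNat]'(by omega)).take (grid.headD []).length) c 0 =
        ((grid[r.toNat]'(by omega)).take (grid.headD []).length)[c.toNat]'(by
          rw [List.length_take]; omega) :=
      PySem.List.pyGetD_eq_getElem _ _ hc.1 (by rw [List.length_take]; omega)
    have h2 : pvGv grid r c = (grid[r.toNat]'(by omega))[c.toNat]'(by omega) := by
      unfold pvGv
      rw [hrow]
      exact PySem.List.pyGetD_eq_getElem _ _ hc.1 (by omega)
    rw [h1, h2, List.getElem_take]
  rw [hfil]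
  apply List.map_congr_left
  intro c _
  simp

-- ---------- bounding-box / fill characterisation shared with the A side ----------

def ShapeOK (grid out : List (List Int)) : Prop :=
  out.map List.length = grid.map List.length

lemma shape_len {grid out : List (List Int)} (hsh : ShapeOK grid out) :
    out.length = grid.length := by
  have := congrArg List.length hsh
  simpa using this

lemma shape_row_len {grid out : List (List Int)} (hsh : ShapeOK grid out) (i : Nat)
    (hi : i < grid.length) : (out.getD i []).length = (grid.getD i []).length := by
  have hlen := shape_len hsh
  rw [List.getD_eq_getElem _ _ (by omega), List.getD_eq_getElem _ _ hi]
  have h1 : (out.map List.length)[i]'(by simpa using (by omega : i < out.length)) =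
      (grid.map List.length)[i]'(by simpa using hi) := by
    congr 1
  simpa using h1

lemma row_len_ge {grid : List (List Int)} (hpre : Pre_solve_fcc82909 grid) (i : Nat)
    (hi : i < grid.length) : (grid.headD []).length ≤ (grid.getD i []).length := by
  rw [List.getD_eq_getElem _ _ hi]
  exact hpre.2 _ (List.getElem_mem hi)

lemma setcell_char (grid out : List (List Int)) (hpre : Pre_solve_fcc82909 grid)
    (hsh : ShapeOK grid out) (r c : Int) (hr : 0 ≤ r ∧ r < (grid.length : Int))
    (hc : 0 ≤ c ∧ c < ((grid.headD []).length : Int)) :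
    ShapeOK grid (PySem.List.pySetD out r (PySem.List.pySetD (PySem.List.pyGetD out r []) c 3)) ∧
    ∀ p : Int × Int, 0 ≤ p.1 → 0 ≤ p.2 →
      pvGv (PySem.List.pySetD out r (PySem.List.pySetD (PySem.List.pyGetD out r []) c 3)) p.1 p.2 =
        if p.1 = r ∧ p.2 = c then 3 else pvGv out p.1 p.2 := by
  have hlen := shape_len hsh
  have hrn : r.toNat < out.length := by omega
  have hrow : PySem.List.pyGetD out r [] = out[r.toNat] :=
    PySem.List.pyGetD_eq_getElem _ _ hr.1 (by omega)
  have hrowlen : (out[r.toNat] : List Int).length = (grid.getD r.toNat []).length := by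
    have := shape_row_len hsh r.toNat (by omega)
    rwa [List.getD_eq_getElem _ _ hrn] at this
  have hCle : ((grid.headD []).length : Int) ≤ ((grid.getD r.toNat []).length : Int) := by
    exact_mod_cast row_len_ge hpre r.toNat (by omega)
  have hcn : c.toNat < (out[r.toNat] : List Int).length := by omega
  have hnewrow : PySem.List.pySetD (PySem.List.pyGetD out r []) c 3 =
      (out[r.toNat] : List Int).set c.toNat 3 := by
    rw [hrow, PySem.List.pySetD_of_nonneg _ _ hc.1]
  have hout' : PySem.List.pySetD out r (PySem.List.pySetD (PySem.List.pyGetD out r []) c 3) =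
      out.set r.toNat ((out[r.toNat] : List Int).set c.toNat 3) := by
    rw [hnewrow, PySem.List.pySetD_of_nonneg _ _ hr.1]
  constructor
  · rw [hout', ShapeOK, ← hsh]
    apply List.ext_getElem
    · simp
    · intro i h1 h2
      simp only [List.getElem_map]
      by_cases hir : i = r.toNat
      · subst hir
        rw [List.getElem_set_self (by simpa using hrn)]
        simp
      · rw [List.getElem_set_ne (by omega)]
  · intro p hp1 hp2
    rw [hout']
    obtain ⟨p1, p2⟩ := p
    simp only at hp1 hp2 ⊢
    unfold pvGv
    by_cases h1 : p1.toNat < out.length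
    · have e1 : PySem.List.pyGetD (out.set r.toNat ((out[r.toNat] : List Int).set c.toNat 3)) p1 [] =
          (out.set r.toNat ((out[r.toNat] : List Int).set c.toNat 3))[p1.toNat]'(by simpa using h1) :=
        PySem.List.pyGetD_eq_getElem _ _ hp1 (by simp; omega)
      have e2 : PySem.List.pyGetD out p1 [] = out[p1.toNat] :=
        PySem.List.pyGetD_eq_getElem _ _ hp1 (by omega)
      rw [e1, e2]
      by_cases hir : p1 = r
      · subst hir
        have hptr : p1.toNat < out.length := h1
        rw [List.getElem_set_self (by simpa using h1)]
        by_cases h2 : p2.toNat < (out[p1.toNat] : List Int).length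
        · have f1 : PySem.List.pyGetD ((out[p1.toNat] : List Int).set c.toNat 3) p2 0 =
              ((out[p1.toNat] : List Int).set c.toNat 3)[p2.toNat]'(by simpa using h2) :=
            PySem.List.pyGetD_eq_getElem _ _ hp2 (by simp; omega)
          have f2 : PySem.List.pyGetD (out[p1.toNat] : List Int) p2 0 =
              (out[p1.toNat] : List Int)[p2.toNat]'h2 :=
            PySem.List.pyGetD_eq_getElem _ _ hp2 (by omega)
          rw [f1, f2]
          by_cases hjc : p2.toNat = c.toNat
          · have : p2 = c := by omega
            subst this
            rw [List.getElem_set_self (by simpa using h2)]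
            simp
          · have : ¬ p2 = c := by omega
            rw [List.getElem_set_ne (by omega)]
            simp [this]
        · have hcol : ¬ p2 = c := by omega
          have g1 : PySem.List.pyGet? ((out[p1.toNat] : List Int).set c.toNat 3) p2 = none := by
            rw [PySem.List.pyGet?_eq_none_iff]
            simp [PySem.Raise.InRange]
            omega
          have g2 : PySem.List.pyGet? (out[p1.toNat] : List Int) p2 = none := by
            rw [PySem.List.pyGet?_eq_none_iff]
            simp [PySem.Raise.InRange]
            omega
          rw [PySem.List.pyGetD_of_none _ _ _ g1, PySem.List.pyGetD_of_none _ _ _ g2]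
          simp [hcol]
      · rw [List.getElem_set_ne (by omega)]
        simp [hir]
    · have hp1r : ¬ p1 = r := by omega
      have e1 : ∀ (l : List (List Int)), l.length = out.length →
          PySem.List.pyGetD l p1 [] = [] := by
        intro l hl
        apply PySem.List.pyGetD_of_none
        rw [PySem.List.pyGet?_eq_none_iff]
        simp [PySem.Raise.InRange]
        omega
      rw [e1 _ (by simp), e1 _ rfl]
      simp [hp1r]

lemma writeCells_char (grid : List (List Int)) (hpre : Pre_solve_fcc82909 grid) (r : Int)
    (hr : 0 ≤ r ∧ r < (grid.length : Int)) :
    ∀ (cs : List Int) (out : List (List Int)), ShapeOK grid out →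
    (∀ c ∈ cs, 0 ≤ c ∧ c < ((grid.headD []).length : Int)) →
    ShapeOK grid (cs.foldl (fun o c =>
        PySem.List.pySetD o r (PySem.List.pySetD (PySem.List.pyGetD o r []) c 3)) out) ∧
    ∀ p : Int × Int, 0 ≤ p.1 → 0 ≤ p.2 →
      pvGv (cs.foldl (fun o c =>
        PySem.List.pySetD o r (PySem.List.pySetD (PySem.List.pyGetD o r []) c 3)) out) p.1 p.2 =
        if p.1 = r ∧ p.2 ∈ cs then 3 else pvGv out p.1 p.2 := by
  intro cs
  induction cs with
  | nil =>
    intro out hsh _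
    refine ⟨hsh, fun p _ _ => ?_⟩
    simp
  | cons c cs ih =>
    intro out hsh hcs
    have hc := hcs c List.mem_cons_self
    obtain ⟨hsh', hval'⟩ := setcell_char grid out hpre hsh r c hr hc
    obtain ⟨hsh'', hval''⟩ := ih _ hsh' (fun c' hc' => hcs c' (List.mem_cons_of_mem _ hc'))
    refine ⟨by simpa using hsh'', fun p hp1 hp2 => ?_⟩
    rw [List.foldl_cons] at *
    rw [hval'' p hp1 hp2, hval' p hp1 hp2]
    by_cases h1 : p.1 = r
    · by_cases h2 : p.2 ∈ cs
      · simp [h1, h2]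
      · by_cases h3 : p.2 = c <;> simp [h1, h2, h3]
    · simp [h1]

lemma writeRow_char (grid : List (List Int)) (hpre : Pre_solve_fcc82909 grid)
    (out : List (List Int)) (hsh : ShapeOK grid out) (r mc Mc : Int)
    (hr : 0 ≤ r ∧ r < (grid.length : Int)) (hmc : 0 ≤ mc)
    (hMc : Mc < ((grid.headD []).length : Int)) :
    ShapeOK grid (pvWriteRow out r mc Mc) ∧
    ∀ p : Int × Int, 0 ≤ p.1 → 0 ≤ p.2 →
      pvGv (pvWriteRow out r mc Mc) p.1 p.2 =
        if p.1 = r ∧ mc ≤ p.2 ∧ p.2 ≤ Mc then 3 else pvGv out p.1 p.2 := by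
  obtain ⟨h1, h2⟩ := writeCells_char grid hpre r hr (PySem.List.pyRange mc (Mc + 1) 1) out hsh
    (fun c hc => by
      rw [PySem.List.mem_pyRange_one] at hc
      omega)
  refine ⟨h1, fun p hp1 hp2 => ?_⟩
  rw [pvWriteRow, h2 p hp1 hp2]
  by_cases h4 : mc ≤ p.2 ∧ p.2 ≤ Mc
  · have h4' : p.2 ∈ PySem.List.pyRange mc (Mc + 1) 1 :=
      PySem.List.mem_pyRange_one.mpr (by omega)
    simp [h4, h4']
  · have h4' : p.2 ∉ PySem.List.pyRange mc (Mc + 1) 1 := fun hm => by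
      have := PySem.List.mem_pyRange_one.mp hm
      omega
    simp [h4, h4']

lemma extend_char (grid : List (List Int)) (hpre : Pre_solve_fcc82909 grid) (mc Mc : Int)
    (hmc : 0 ≤ mc) (hMc : Mc < ((grid.headD []).length : Int)) :
    ∀ (rows : List Int) (out : List (List Int)), ShapeOK grid out →
    (∀ r ∈ rows, 0 ≤ r ∧ r < (grid.length : Int)) →
    ShapeOK grid (pvExtend grid mc Mc out rows) ∧
    ∀ p : Int × Int, 0 ≤ p.1 → 0 ≤ p.2 →
      pvGv (pvExtend grid mc Mc out rows) p.1 p.2 =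
        if p.1 ∈ rows.takeWhile (fun r => pvAllZero grid r mc Mc) ∧ mc ≤ p.2 ∧ p.2 ≤ Mc
        then 3 else pvGv out p.1 p.2 := by
  intro rows
  induction rows with
  | nil =>
    intro out hsh _
    refine ⟨hsh, fun p _ _ => ?_⟩
    simp [pvExtend]
  | cons r rest ih =>
    intro out hsh hrows
    by_cases haz : pvAllZero grid r mc Mc
    · have hr := hrows r List.mem_cons_self
      obtain ⟨hsh', hval'⟩ := writeRow_char grid hpre out hsh r mc Mc hr hmc hMc
      obtain ⟨hsh'', hval''⟩ := ih _ hsh' (fun r' hr' => hrows r' (List.mem_cons_of_mem _ hr'))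
      have hstep : pvExtend grid mc Mc out (r :: rest) =
          pvExtend grid mc Mc (pvWriteRow out r mc Mc) rest := by
        rw [pvExtend, if_pos haz]
      have htw : (r :: rest).takeWhile (fun r => pvAllZero grid r mc Mc) =
          r :: rest.takeWhile (fun r => pvAllZero grid r mc Mc) := by
        rw [List.takeWhile_cons, if_pos haz]
      refine ⟨by rw [hstep]; exact hsh'', fun p hp1 hp2 => ?_⟩
      rw [hstep, hval'' p hp1 hp2, hval' p hp1 hp2, htw]
      simp only [List.mem_cons]
      split_ifs <;> try rfl
      all_goals tauto
    · have hstep : pvExtend grid mc Mc out (r :: rest) = out := by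
        rw [pvExtend, if_neg haz]
      have htw : (r :: rest).takeWhile (fun r => pvAllZero grid r mc Mc) = [] := by
        rw [List.takeWhile_cons, if_neg haz]
      refine ⟨by rw [hstep]; exact hsh, fun p hp1 hp2 => ?_⟩
      rw [hstep, htw]
      simp

def RowsDown (grid : List (List Int)) (Mr mc Mc : Int) : List Int :=
  (PySem.List.pyRange (Mr + 1) (grid.length : Int) 1).takeWhile
    (fun r => pvAllZero grid r mc Mc)

def RowsUp (grid : List (List Int)) (mr mc Mc : Int) : List Int :=
  (PySem.List.pyRange (mr - 1) (-1) (-1)).takeWhile (fun r => pvAllZero grid r mc Mc)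

def FillP (grid : List (List Int)) (mr Mr mc Mc : Int) (p : Int × Int) : Prop :=
  (mc ≤ p.2 ∧ p.2 ≤ Mc) ∧ (p.1 ∈ RowsDown grid Mr mc Mc ∨ p.1 ∈ RowsUp grid mr mc Mc)

def ClsFill (grid : List (List Int)) (z p : Int × Int) : Prop :=
  ∃ mr Mr mc Mc, IsBox grid z mr Mr mc Mc ∧ FillP grid mr Mr mc Mc p

lemma clsFill_congr (grid : List (List Int)) {z z' : Int × Int} (h : ReachP grid z z')
    (p : Int × Int) : ClsFill grid z p ↔ ClsFill grid z' p := by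
  constructor
  · rintro ⟨mr, Mr, mc, Mc, hb, hf⟩
    have hsym : ReachP grid z' z :=
      (Relation.ReflTransGen.symmetric (fun _ _ hab => adj_symm grid hab)) h
    exact ⟨mr, Mr, mc, Mc, isBox_congr grid hsym hb, hf⟩
  · rintro ⟨mr, Mr, mc, Mc, hb, hf⟩
    exact ⟨mr, Mr, mc, Mc, isBox_congr grid h hb, hf⟩

lemma rows_down_valid (grid : List (List Int)) {Mr r : Int} (hMr : 0 ≤ Mr)
    (hr : r ∈ PySem.List.pyRange (Mr + 1) (grid.length : Int) 1) :
    0 ≤ r ∧ r < (grid.length : Int) := by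
  rw [PySem.List.mem_pyRange_one] at hr
  omega

lemma rows_up_valid (grid : List (List Int)) {mr r : Int} (hmr : mr < (grid.length : Int))
    (hr : r ∈ PySem.List.pyRange (mr - 1) (-1) (-1)) :
    0 ≤ r ∧ r < (grid.length : Int) := by
  rw [PySem.List.pyRange_neg_one, List.mem_map] at hr
  obtain ⟨k, hk, rfl⟩ := hr
  rw [List.mem_range] at hk
  omega

lemma fill_char (grid : List (List Int)) (hpre : Pre_solve_fcc82909 grid)
    (out : List (List Int)) (hsh : ShapeOK grid out) {z : Int × Int}
    {b : List (Int × Int × Int)} (hz : nzP grid z) (hb : BlockOf grid z b) :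
    ShapeOK grid (pvFill grid (grid.length : Int) out b) ∧
    ∀ p : Int × Int, 0 ≤ p.1 → 0 ≤ p.2 →
      (ClsFill grid z p → pvGv (pvFill grid (grid.length : Int) out b) p.1 p.2 = 3) ∧
      (¬ ClsFill grid z p →
        pvGv (pvFill grid (grid.length : Int) out b) p.1 p.2 = pvGv out p.1 p.2) := by
  have hne : b.map (fun t => t.1) ≠ [] := by
    intro h
    exact block_ne_nil grid hz hb (by simpa using h)
  have hne2 : b.map (fun t : Int × Int × Int => t.2.1) ≠ [] := by
    intro h
    exact block_ne_nil grid hz hb (by simpa using h)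
  obtain ⟨mr, h1⟩ : ∃ v, PySem.List.min? (b.map (fun t => t.1)) (fun x => x) = some v := by
    cases hh : PySem.List.min? (b.map (fun t => t.1)) (fun x => x) with
    | none => exact absurd ((PySem.List.min?_eq_none_iff _ _).mp hh) hne
    | some v => exact ⟨v, rfl⟩
  obtain ⟨Mr, h2⟩ : ∃ v, PySem.List.max? (b.map (fun t => t.1)) (fun x => x) = some v := by
    cases hh : PySem.List.max? (b.map (fun t => t.1)) (fun x => x) with
    | none => exact absurd ((PySem.List.max?_eq_none_iff _ _).mp hh) hne
    | some v => exact ⟨v, rfl⟩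
  obtain ⟨mc, h3⟩ : ∃ v, PySem.List.min? (b.map (fun t : Int × Int × Int => t.2.1)) (fun x => x) = some v := by
    cases hh : PySem.List.min? (b.map (fun t : Int × Int × Int => t.2.1)) (fun x => x) with
    | none => exact absurd ((PySem.List.min?_eq_none_iff _ _).mp hh) hne2
    | some v => exact ⟨v, rfl⟩
  obtain ⟨Mc, h4⟩ : ∃ v, PySem.List.max? (b.map (fun t : Int × Int × Int => t.2.1)) (fun x => x) = some v := by
    cases hh : PySem.List.max? (b.map (fun t : Int × Int × Int => t.2.1)) (fun x => x) with
    | none => exact absurd ((PySem.List.max?_eq_none_iff _ _).mp hh) hne2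
    | some v => exact ⟨v, rfl⟩
  have hbox := block_box grid hz hb h1 h2 h3 h4
  have hbounds := isBox_bounds grid hz hbox
  have hfill : pvFill grid (grid.length : Int) out b =
      pvExtend grid mc Mc
        (pvExtend grid mc Mc out (PySem.List.pyRange (Mr + 1) (grid.length : Int) 1))
        (PySem.List.pyRange (mr - 1) (-1) (-1)) := by
    rw [pvFill, h1, h2, h3, h4]
  obtain ⟨hshD, hvalD⟩ := extend_char grid hpre mc Mc (by omega) (by omega)
    (PySem.List.pyRange (Mr + 1) (grid.length : Int) 1) out hsh
    (fun r hr => rows_down_valid grid (by omega) hr)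
  obtain ⟨hshU, hvalU⟩ := extend_char grid hpre mc Mc (by omega) (by omega)
    (PySem.List.pyRange (mr - 1) (-1) (-1)) _ hshD
    (fun r hr => rows_up_valid grid (by omega) hr)
  have hcond : ∀ p, ClsFill grid z p ↔ FillP grid mr Mr mc Mc p := by
    intro p
    constructor
    · rintro ⟨mr', Mr', mc', Mc', hbox', hf⟩
      obtain ⟨e1, e2, e3, e4⟩ := isBox_unique grid hbox' hbox
      rw [← e1, ← e2, ← e3, ← e4]
      exact hf
    · intro hf
      exact ⟨mr, Mr, mc, Mc, hbox, hf⟩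
  constructor
  · rw [hfill]; exact hshU
  · intro p hp1 hp2
    constructor
    · intro hcf
      obtain ⟨hcol, hrow⟩ := (hcond p).mp hcf
      rw [hfill, hvalU p hp1 hp2]
      rcases hrow with hd | hu
      · rw [if_neg, hvalD p hp1 hp2, if_pos ⟨hd, hcol⟩]
        rintro ⟨hu, -⟩
        have hd' := PySem.List.mem_pyRange_one.mp
          (List.Sublist.mem hd (List.takeWhile_sublist _))
        have hu' := rows_up_valid grid (by omega) (List.Sublist.mem hu (List.takeWhile_sublist _))
        have hu'' := List.Sublist.mem hu (List.takeWhile_sublist _)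
        rw [PySem.List.pyRange_neg_one, List.mem_map] at hu''
        obtain ⟨k, hk, hke⟩ := hu''
        rw [List.mem_range] at hk
        omega
      · rw [if_pos ⟨hu, hcol⟩]
    · intro hcf
      have hnf : ¬ FillP grid mr Mr mc Mc p := fun hf => hcf ((hcond p).mpr hf)
      rw [hfill, hvalU p hp1 hp2, if_neg, hvalD p hp1 hp2, if_neg]
      · intro ⟨hd, hcol⟩
        exact hnf ⟨hcol, Or.inl hd⟩
      · intro ⟨hu, hcol⟩
        exact hnf ⟨hcol, Or.inr hu⟩

def InvA (grid : List (List Int)) (pre : List (Int × Int))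
    (s : PySem.Set (Int × Int) × List (List (Int × Int × Int))) : Prop :=
  (∀ p, p ∈ s.1 ↔ ∃ z ∈ pre, ReachP grid z p) ∧
  (∀ b ∈ s.2, ∃ z, nzP grid z ∧ BlockOf grid z b) ∧
  (∀ z ∈ pre, ∃ b ∈ s.2, ∃ z', nzP grid z' ∧ ReachP grid z' z ∧ BlockOf grid z' b)

lemma visited_closed (grid : List (List Int)) {pre : List (Int × Int)}
    {V : List (Int × Int)} (hpre : ∀ z ∈ pre, nzP grid z)
    (hV : ∀ p, p ∈ V ↔ ∃ z ∈ pre, ReachP grid z p) :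
    ∀ a b, a ∈ V → adjP grid a b → b ∈ V := by
  intro a b ha hadj
  obtain ⟨z, hz, hr⟩ := (hV a).mp ha
  exact (hV b).mpr ⟨z, hz, hr.tail hadj⟩

lemma scanA_inv (grid : List (List Int)) :
    ∀ (suf pre : List (Int × Int)) (s : PySem.Set (Int × Int) × List (List (Int × Int × Int))),
    pre ++ suf = pvNonzeroL grid → InvA grid pre s →
    InvA grid (pre ++ suf) (suf.foldl (fun s cell =>
      if !(PySem.Set.contains s.1 cell) then
        (let res := pvDfs grid (PySem.List.len grid)
              (PySem.List.len (PySem.List.pyGetD grid 0 []))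
              (5 * ((PySem.List.len grid).toNat *
                (PySem.List.len (PySem.List.pyGetD grid 0 [])).toNat) + 2) s.1 [] [cell];
          (res.1, s.2 ++ [res.2]))
      else s) s) := by
  intro suf
  induction suf with
  | nil =>
    intro pre s _ hinv
    simpa using hinv
  | cons z suf ih =>
    intro pre s hsplit hinv
    have hz_nonzero : z ∈ pvNonzeroL grid := by
      rw [← hsplit]
      simp
    have hz : nzP grid z := (mem_nonzero grid z).mp hz_nonzero
    have hprenz : ∀ w ∈ pre, nzP grid w := by
      intro w hw
      apply (mem_nonzero grid w).mp
      rw [← hsplit]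
      simp [hw]
    obtain ⟨ha, hb, hc⟩ := hinv
    have hnext : InvA grid (pre ++ [z]) ((fun s cell =>
        if !(PySem.Set.contains s.1 cell) then
          (let res := pvDfs grid (PySem.List.len grid)
                (PySem.List.len (PySem.List.pyGetD grid 0 []))
                (5 * ((PySem.List.len grid).toNat *
                  (PySem.List.len (PySem.List.pyGetD grid 0 [])).toNat) + 2) s.1 [] [cell];
            (res.1, s.2 ++ [res.2]))
        else s) s z) := by
      by_cases hseen : PySem.Set.contains s.1 z = true
      · simp only [hseen, Bool.not_true, Bool.false_eq_true, if_false]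
        obtain ⟨z', hz', hrz'⟩ := (ha z).mp ((PySem.Set.contains_iff _ _).mp hseen)
        refine ⟨fun p => ?_, hb, fun w hw => ?_⟩
        · rw [ha p]
          constructor
          · rintro ⟨z'', hz'', hr⟩
            exact ⟨z'', by simp [hz''], hr⟩
          · rintro ⟨z'', hz'', hr⟩
            rcases List.mem_append.mp hz'' with hm | hm
            · exact ⟨z'', hm, hr⟩
            · have : z'' = z := by simpa using hm
              subst this
              exact ⟨z', hz', hrz'.trans hr⟩
        · rcases List.mem_append.mp hw with hm | hm
          · exact hc w hm
          · have : w = z := by simpa using hm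
            subst this
            obtain ⟨b, hbm, z'', hnz'', hr'', hbo⟩ := hc z' hz'
            exact ⟨b, hbm, z'', hnz'', hr''.trans hrz', hbo⟩
      · have hzV : z ∉ s.1 := fun h => hseen ((PySem.Set.contains_iff _ _).mpr h)
        have hcl := visited_closed grid hprenz ha
        obtain ⟨Δ, hres, hmem⟩ := dfs_spec grid
          (5 * ((PySem.List.len grid).toNat *
            (PySem.List.len (PySem.List.pyGetD grid 0 [])).toNat) + 2) s.1 [] [z]
          (by intro p hp; simp at hp; subst hp; exact hz.1)
          (by
            have hle1 : ((pvNonzeroL grid).filter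
                (fun q => !(PySem.Set.contains s.1 q))).length ≤ (pvNonzeroL grid).length :=
              List.length_filter_le _ _
            have hle2 := len_nonzero_le grid
            have he1 : (PySem.List.len grid).toNat = grid.length := by
              simp [PySem.List.len_eq]
            have he2 : (PySem.List.len (PySem.List.pyGetD grid 0 [])).toNat =
                (grid.headD []).length := by
              simp [PySem.List.len_eq, PySem.List.pyGetD_zero, List.getD,
                List.head?_eq_getElem?]
            rw [he1, he2]
            simp only [List.length_cons, List.length_nil]
            omega)
        have hΔ : ∀ p, p ∈ Δ ↔ ReachP grid z p := by
          intro p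
          rw [hmem p]
          exact AR_seed grid hcl hzV hz p
        have hdisj : ∀ p, ReachP grid z p → p ∉ s.1 := by
          intro p hr hp
          obtain ⟨z', hz', hrz'⟩ := (ha p).mp hp
          have hsym : ReachP grid p z :=
            (Relation.ReflTransGen.symmetric (fun _ _ hab => adj_symm grid hab)) hr
          exact hzV ((ha z).mpr ⟨z', hz', hrz'.trans hsym⟩)
        simp only [hseen, Bool.not_false, if_true]
        rw [hres]
        refine ⟨fun p => ?_, fun b hbm => ?_, fun w hw => ?_⟩
        · simp only [List.mem_append]
          rw [ha p]
          constructor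
          · rintro (⟨z'', hz'', hr⟩ | hd)
            · exact ⟨z'', by simp [hz''], hr⟩
            · exact ⟨z, by simp, (hΔ p).mp hd⟩
          · rintro ⟨z'', hz'', hr⟩
            rcases hz'' with hm | hm
            · exact Or.inl ⟨z'', hm, hr⟩
            · have hzz : z'' = z := by simpa using hm
              subst hzz
              exact Or.inr ((hΔ p).mpr hr)
        · simp only [List.mem_append, List.mem_singleton] at hbm
          rcases hbm with hm | hm
          · exact hb b hm
          · subst hm
            refine ⟨z, hz, fun t => ?_⟩
            simp only [List.nil_append, List.mem_map]
            constructor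
            · rintro ⟨p, hp, rfl⟩
              exact ⟨p, (hΔ p).mp hp, rfl⟩
            · rintro ⟨p, hp, rfl⟩
              exact ⟨p, (hΔ p).mpr hp, rfl⟩
        · rcases List.mem_append.mp hw with hm | hm
          · obtain ⟨b, hbm, rest⟩ := hc w hm
            exact ⟨b, by simp [hbm], rest⟩
          · have hwz : w = z := by simpa using hm
            refine ⟨[] ++ Δ.map (triF grid), by simp, z, hz,
              by rw [hwz]; exact Relation.ReflTransGen.refl, fun t => ?_⟩
            simp only [List.nil_append, List.mem_map]
            constructor
            · rintro ⟨p, hp, rfl⟩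
              exact ⟨p, (hΔ p).mp hp, rfl⟩
            · rintro ⟨p, hp, rfl⟩
              exact ⟨p, (hΔ p).mpr hp, rfl⟩
    have := ih (pre ++ [z]) _ (by simpa using hsplit) hnext
    simpa using this

-- ---------- B-side scan invariant ----------

lemma scanB_inv (grid : List (List Int)) (hpre : Pre_solve_fcc82909 grid) :
    ∀ (suf pre : List (Int × Int)) (seen fills : PySem.Set (Int × Int)),
    pre ++ suf = pvNonzeroL grid →
    (∀ p, p ∈ seen ↔ ∃ z ∈ pre, ReachP grid z p) →
    (∀ p, p ∈ fills ↔ ∃ z ∈ pre, ClsFill grid z p) →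
    ∀ p, p ∈ pvScanB (grid.length : Int) (pvNonzeroL grid) suf seen fills ↔
      ∃ z ∈ pvNonzeroL grid, ClsFill grid z p := by
  intro suf
  induction suf with
  | nil =>
    intro pre seen fills hsplit hseen hfills p
    simp only [List.append_nil] at hsplit
    subst hsplit
    exact hfills p
  | cons cell rest ih =>
    intro pre seen fills hsplit hseen hfills p
    have hcell_nonzero : cell ∈ pvNonzeroL grid := by
      rw [← hsplit]; simp
    have hz : nzP grid cell := (mem_nonzero grid cell).mp hcell_nonzero
    have hstep : pvScanB (grid.length : Int) (pvNonzeroL grid) (cell :: rest) seen fills =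
        (if PySem.Set.contains seen cell then
          pvScanB (grid.length : Int) (pvNonzeroL grid) rest seen fills
        else
          let comp := pvSat (pvNonzeroL grid) ((pvNonzeroL grid).length + 1) [cell]
            (pvNear (pvNonzeroL grid) [cell])
          let seen' := PySem.Set.union seen (PySem.Set.ofList comp)
          let b := pvBox comp (cell.1, cell.1, cell.2, cell.2)
          let rows := pvGrow (pvNonzeroL grid) b.2.2.1 b.2.2.2
              (PySem.List.pyRange (b.2.1 + 1) (grid.length : Int) 1) ++
            pvGrow (pvNonzeroL grid) b.2.2.1 b.2.2.2
              (PySem.List.pyRange (b.1 - 1) (-1) (-1))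
          pvScanB (grid.length : Int) (pvNonzeroL grid) rest seen'
            (pvAddRows b.2.2.1 b.2.2.2 fills rows)) := rfl
    rw [hstep]
    by_cases hseenc : PySem.Set.contains seen cell = true
    · rw [if_pos hseenc]
      obtain ⟨z', hz', hrz'⟩ := (hseen cell).mp ((PySem.Set.contains_iff _ _).mp hseenc)
      refine ih (pre ++ [cell]) seen fills (by simpa using hsplit) ?_ ?_ p
      · intro q
        rw [hseen q]
        constructor
        · rintro ⟨z'', hz'', hr⟩
          exact ⟨z'', by simp [hz''], hr⟩
        · rintro ⟨z'', hz'', hr⟩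
          rcases List.mem_append.mp hz'' with hm | hm
          · exact ⟨z'', hm, hr⟩
          · have : z'' = cell := by simpa using hm
            subst this
            exact ⟨z', hz', hrz'.trans hr⟩
      · intro q
        rw [hfills q]
        constructor
        · rintro ⟨z'', hz'', hcf⟩
          exact ⟨z'', by simp [hz''], hcf⟩
        · rintro ⟨z'', hz'', hcf⟩
          rcases List.mem_append.mp hz'' with hm | hm
          · exact ⟨z'', hm, hcf⟩
          · have : z'' = cell := by simpa using hm
            subst this
            exact ⟨z', hz', (clsFill_congr grid hrz' q).mpr hcf⟩
    · rw [if_neg hseenc]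
      have hcomp : ∀ q, q ∈ pvSat (pvNonzeroL grid) ((pvNonzeroL grid).length + 1) [cell]
          (pvNear (pvNonzeroL grid) [cell]) ↔ ReachP grid cell q :=
        sat_spec grid hz ((pvNonzeroL grid).length + 1) [cell] (by simp)
          (by simpa using hcell_nonzero)
          (by intro q hq; simp at hq; subst hq; exact Relation.ReflTransGen.refl)
          (by simp) (by simp)
      have hbox := box_isBox grid hcomp
      have hbounds := isBox_bounds grid hz hbox
      set comp := pvSat (pvNonzeroL grid) ((pvNonzeroL grid).length + 1) [cell]
        (pvNear (pvNonzeroL grid) [cell]) with hcompdef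
      set bb := pvBox comp (cell.1, cell.1, cell.2, cell.2) with hbbdef
      have hgrowD : pvGrow (pvNonzeroL grid) bb.2.2.1 bb.2.2.2
          (PySem.List.pyRange (bb.2.1 + 1) (grid.length : Int) 1) =
          RowsDown grid bb.2.1 bb.2.2.1 bb.2.2.2 := by
        rw [RowsDown]
        exact grow_eq grid (by omega) (by omega) _
          (fun r hr => rows_down_valid grid (by omega) hr)
      have hgrowU : pvGrow (pvNonzeroL grid) bb.2.2.1 bb.2.2.2
          (PySem.List.pyRange (bb.1 - 1) (-1) (-1)) =
          RowsUp grid bb.1 bb.2.2.1 bb.2.2.2 := by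
        rw [RowsUp]
        exact grow_eq grid (by omega) (by omega) _
          (fun r hr => rows_up_valid grid (by omega) hr)
      have hcond : ∀ q, ClsFill grid cell q ↔ FillP grid bb.1 bb.2.1 bb.2.2.1 bb.2.2.2 q := by
        intro q
        constructor
        · rintro ⟨mr', Mr', mc', Mc', hbox', hf⟩
          obtain ⟨e1, e2, e3, e4⟩ := isBox_unique grid hbox' hbox
          rw [← e1, ← e2, ← e3, ← e4]
          exact hf
        · intro hf
          exact ⟨bb.1, bb.2.1, bb.2.2.1, bb.2.2.2, hbox, hf⟩
      refine ih (pre ++ [cell]) _ _ (by simpa using hsplit) ?_ ?_ p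
      · intro q
        rw [PySem.Set.mem_union, hseen q]
        constructor
        · rintro (⟨z'', hz'', hr⟩ | hd)
          · exact ⟨z'', by simp [hz''], hr⟩
          · rw [PySem.Set.mem_ofList] at hd
            exact ⟨cell, by simp, (hcomp q).mp hd⟩
        · rintro ⟨z'', hz'', hr⟩
          rcases List.mem_append.mp hz'' with hm | hm
          · exact Or.inl ⟨z'', hm, hr⟩
          · have : z'' = cell := by simpa using hm
            subst this
            exact Or.inr ((PySem.Set.mem_ofList _ _).mpr ((hcomp q).mpr hr))
      · intro q
        rw [addRows_char, hfills q, hgrowD, hgrowU, List.mem_append]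
        constructor
        · rintro (⟨z'', hz'', hcf⟩ | ⟨hrow, h1, h2⟩)
          · exact ⟨z'', by simp [hz''], hcf⟩
          · exact ⟨cell, by simp, (hcond q).mpr ⟨⟨h1, h2⟩, hrow⟩⟩
        · rintro ⟨z'', hz'', hcf⟩
          rcases List.mem_append.mp hz'' with hm | hm
          · exact Or.inl ⟨z'', hm, hcf⟩
          · have : z'' = cell := by simpa using hm
            subst this
            obtain ⟨⟨h1, h2⟩, hrow⟩ := (hcond q).mp hcf
            exact Or.inr ⟨hrow, h1, h2⟩

lemma blockOf_cls (grid : List (List Int)) {z1 z2 : Int × Int} {b : List (Int × Int × Int)}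
    (hz1 : nzP grid z1) (h1 : BlockOf grid z1 b) (h2 : BlockOf grid z2 b) (p : Int × Int) :
    ClsFill grid z1 p ↔ ClsFill grid z2 p := by
  have hzin : triF grid z1 ∈ b := (h1 _).mpr ⟨z1, Relation.ReflTransGen.refl, rfl⟩
  obtain ⟨q, hq, he⟩ := (h2 _).mp hzin
  have hq1 : q = z1 := by
    obtain ⟨a, b⟩ := q
    obtain ⟨a1, b1⟩ := z1
    simp [triF] at he
    simp [he.1, he.2.1]
  subst hq1
  exact (clsFill_congr grid hq p).symm

def PredBlocks (grid : List (List Int)) (blocks : List (List (Int × Int × Int)))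
    (p : Int × Int) : Prop :=
  ∃ b ∈ blocks, ∃ z, nzP grid z ∧ BlockOf grid z b ∧ ClsFill grid z p

lemma foldFill_char (grid : List (List Int)) (hpre : Pre_solve_fcc82909 grid) :
    ∀ (blocks : List (List (Int × Int × Int))) (out : List (List Int)), ShapeOK grid out →
    (∀ b ∈ blocks, ∃ z, nzP grid z ∧ BlockOf grid z b) →
    ShapeOK grid (blocks.foldl (fun o block => pvFill grid (grid.length : Int) o block) out) ∧
    ∀ p : Int × Int, 0 ≤ p.1 → 0 ≤ p.2 →
      (PredBlocks grid blocks p →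
        pvGv (blocks.foldl (fun o block => pvFill grid (grid.length : Int) o block) out)
          p.1 p.2 = 3) ∧
      (¬ PredBlocks grid blocks p →
        pvGv (blocks.foldl (fun o block => pvFill grid (grid.length : Int) o block) out)
          p.1 p.2 = pvGv out p.1 p.2) := by
  intro blocks
  induction blocks with
  | nil =>
    intro out hsh _
    refine ⟨hsh, fun p _ _ => ⟨fun h => ?_, fun _ => rfl⟩⟩
    obtain ⟨b, hb, _⟩ := h
    simp at hb
  | cons b bs ih =>
    intro out hsh hgood
    obtain ⟨z, hz, hbo⟩ := hgood b List.mem_cons_self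
    obtain ⟨hsh1, hval1⟩ := fill_char grid hpre out hsh hz hbo
    obtain ⟨hsh2, hval2⟩ := ih _ hsh1 (fun b' hb' => hgood b' (List.mem_cons_of_mem _ hb'))
    rw [List.foldl_cons]
    refine ⟨hsh2, fun p hp1 hp2 => ⟨fun hPred => ?_, fun hPred => ?_⟩⟩
    · by_cases hbs : PredBlocks grid bs p
      · exact (hval2 p hp1 hp2).1 hbs
      · rw [(hval2 p hp1 hp2).2 hbs]
        obtain ⟨b', hb', z', hz', hbo', hcf'⟩ := hPred
        rcases List.mem_cons.mp hb' with rfl | hm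
        · exact (hval1 p hp1 hp2).1 ((blockOf_cls grid hz' hbo' hbo p).mp hcf')
        · exact absurd ⟨b', hm, z', hz', hbo', hcf'⟩ hbs
    · have hbs : ¬ PredBlocks grid bs p := fun ⟨b', hb', rest⟩ =>
        hPred ⟨b', List.mem_cons_of_mem _ hb', rest⟩
      rw [(hval2 p hp1 hp2).2 hbs]
      exact (hval1 p hp1 hp2).2 (fun hcf =>
        hPred ⟨b, List.mem_cons_self, z, hz, hbo, hcf⟩)

lemma predBlocks_iff (grid : List (List Int)) {blocks : List (List (Int × Int × Int))}
    (hb : ∀ b ∈ blocks, ∃ z, nzP grid z ∧ BlockOf grid z b)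
    (hc : ∀ z ∈ pvNonzeroL grid, ∃ b ∈ blocks, ∃ z', nzP grid z' ∧ ReachP grid z' z ∧
      BlockOf grid z' b) (p : Int × Int) :
    PredBlocks grid blocks p ↔ ∃ z, nzP grid z ∧ ClsFill grid z p := by
  constructor
  · rintro ⟨b, hbm, z, hz, _, hcf⟩
    exact ⟨z, hz, hcf⟩
  · rintro ⟨z, hz, hcf⟩
    obtain ⟨b, hbm, z', hnz', hr', hbo'⟩ := hc z ((mem_nonzero grid z).mpr hz)
    exact ⟨b, hbm, z', hnz', hbo', (clsFill_congr grid hr' p).mpr hcf⟩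

lemma foldl_nested {α : Type} (rows cols : List Int) (f : α → (Int × Int) → α) (init : α) :
    rows.foldl (fun s r => cols.foldl (fun s c => f s (r, c)) s) init =
      (rows.flatMap (fun r => cols.map (fun c => (r, c)))).foldl f init := by
  induction rows generalizing init with
  | nil => simp
  | cons r rows ih =>
    simp only [List.foldl_cons, List.flatMap_cons, List.foldl_append, List.foldl_map]
    rw [ih]

lemma pairs_filter_eq (grid : List (List Int)) :
    ((PySem.List.pyRange 0 (PySem.List.len grid) 1).flatMap (fun r =>
      (PySem.List.pyRange 0 (PySem.List.len (PySem.List.pyGetD grid 0 [])) 1).map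
        (fun c => (r, c)))).filter (fun p => !(pvGv grid p.1 p.2 == 0)) = pvNonzeroL grid := by
  rw [pvNonzeroL, List.filter_flatMap]
  apply List.flatMap_congr
  intro r _
  rw [List.filter_map]
  rfl

def bodyFullA (grid : List (List Int))
    (s : PySem.Set (Int × Int) × List (List (Int × Int × Int))) (p : Int × Int) :
    PySem.Set (Int × Int) × List (List (Int × Int × Int)) :=
  if !(pvGv grid p.1 p.2 == 0) && !(PySem.Set.contains s.1 p) then
    (let res := pvDfs grid (PySem.List.len grid)
          (PySem.List.len (PySem.List.pyGetD grid 0 []))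
          (5 * ((PySem.List.len grid).toNat *
            (PySem.List.len (PySem.List.pyGetD grid 0 [])).toNat) + 2) s.1 [] [p];
      (res.1, s.2 ++ [res.2]))
  else s

def bodyA (grid : List (List Int))
    (s : PySem.Set (Int × Int) × List (List (Int × Int × Int))) (cell : Int × Int) :
    PySem.Set (Int × Int) × List (List (Int × Int × Int)) :=
  if !(PySem.Set.contains s.1 cell) then
    (let res := pvDfs grid (PySem.List.len grid)
          (PySem.List.len (PySem.List.pyGetD grid 0 []))
          (5 * ((PySem.List.len grid).toNat *
            (PySem.List.len (PySem.List.pyGetD grid 0 [])).toNat) + 2) s.1 [] [cell];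
      (res.1, s.2 ++ [res.2]))
  else s

lemma foldl_nestedA (grid : List (List Int)) (rows cols : List Int)
    (init : PySem.Set (Int × Int) × List (List (Int × Int × Int))) :
    rows.foldl (fun s r => cols.foldl (fun s c => bodyFullA grid s (r, c)) s) init =
      (rows.flatMap (fun r => cols.map (fun c => (r, c)))).foldl (bodyFullA grid) init :=
  foldl_nested rows cols (bodyFullA grid) init

lemma guardA (grid : List (List Int)) (l : List (Int × Int))
    (init : PySem.Set (Int × Int) × List (List (Int × Int × Int))) :
    l.foldl (bodyFullA grid) init =
      (l.filter (fun p => !(pvGv grid p.1 p.2 == 0))).foldl (bodyA grid) init := by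
  rw [← PySem.List.foldl_if_eq_foldl_filter]
  apply PySem.List.foldl_congr_mem
  intro acc x _
  rw [bodyFullA, bodyA]
  by_cases h1 : !(pvGv grid x.1 x.2 == 0)
  · by_cases h2 : !(PySem.Set.contains acc.1 x) <;> simp [h1, h2]
  · simp [h1]

lemma pvGv_getElem (o : List (List Int)) (i j : Nat) (hi : i < o.length)
    (hj : j < (o[i]).length) : pvGv o (i : Int) (j : Int) = o[i][j] := by
  unfold pvGv
  rw [PySem.List.pyGetD_natCast]
  rw [PySem.List.pyGetD_natCast]
  rw [List.getD_eq_getElem o [] hi]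
  rw [List.getD_eq_getElem _ 0 hj]

lemma main_eq (grid : List (List Int)) (hpre : Pre_solve_fcc82909 grid) :
    solve_fcc82909 grid = solve_fcc82909_alt grid := by
  obtain ⟨hAa, hAb, hAc⟩ := scanA_inv grid (pvNonzeroL grid) []
    ((PySem.Set.empty : PySem.Set (Int × Int)), ([] : List (List (Int × Int × Int))))
    (by simp) ⟨by simp [PySem.Set.empty], by simp, by simp⟩
  simp only [List.nil_append] at hAa hAb hAc
  have hAb' : ∀ b ∈ (((pvNonzeroL grid).foldl (bodyA grid)
      ((PySem.Set.empty : PySem.Set (Int × Int)),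
        ([] : List (List (Int × Int × Int))))).2), ∃ z, nzP grid z ∧ BlockOf grid z b := hAb
  have hAc' : ∀ z ∈ pvNonzeroL grid, ∃ b ∈ (((pvNonzeroL grid).foldl (bodyA grid)
      ((PySem.Set.empty : PySem.Set (Int × Int)),
        ([] : List (List (Int × Int × Int))))).2), ∃ z', nzP grid z' ∧ ReachP grid z' z ∧
      BlockOf grid z' b := hAc
  have hA : solve_fcc82909 grid =
      (((pvNonzeroL grid).foldl (bodyA grid)
        ((PySem.Set.empty : PySem.Set (Int × Int)),
          ([] : List (List (Int × Int × Int))))).2).foldl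
        (fun o block => pvFill grid (PySem.List.len grid) o block)
        (grid.map (fun row => PySem.List.slice row none none)) := by
    show (((PySem.List.pyRange 0 (PySem.List.len grid) 1).foldl (fun s r =>
        (PySem.List.pyRange 0 (PySem.List.len (PySem.List.pyGetD grid 0 [])) 1).foldl
          (fun s c => bodyFullA grid s (r, c)) s)
        ((PySem.Set.empty : PySem.Set (Int × Int)),
          ([] : List (List (Int × Int × Int))))).2).foldl
        (fun o block => pvFill grid (PySem.List.len grid) o block)
        (grid.map (fun row => PySem.List.slice row none none)) = _
    rw [foldl_nestedA, guardA, pairs_filter_eq]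
  have hC : PySem.List.len (PySem.List.pyGetD grid 0 []) =
      (((grid.headD []).length : Nat) : Int) := by
    simp [PySem.List.len_eq, PySem.List.pyGetD_zero, List.getD, List.head?_eq_getElem?]
  have hR : PySem.List.len grid = ((grid.length : Nat) : Int) := by
    simp [PySem.List.len_eq]
  have hB : solve_fcc82909_alt grid = grid.mapIdx (fun r row => row.mapIdx (fun c v =>
      if PySem.Set.contains (pvScanB (grid.length : Int) (pvNonzeroL grid) (pvNonzeroL grid)
          PySem.Set.empty PySem.Set.empty) ((r : Int), (c : Int))
      then 3 else v)) := by
    show grid.mapIdx (fun r row => row.mapIdx (fun c v =>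
      if PySem.Set.contains (pvScanB (PySem.List.len grid)
          (pvCellsOf grid (PySem.List.len (PySem.List.pyGetD grid 0 [])))
          (pvCellsOf grid (PySem.List.len (PySem.List.pyGetD grid 0 [])))
          PySem.Set.empty PySem.Set.empty) ((r : Int), (c : Int))
      then 3 else v)) = _
    rw [hC, hR, cells_eq grid hpre]
  have hBf : ∀ p, p ∈ pvScanB (grid.length : Int) (pvNonzeroL grid) (pvNonzeroL grid)
      PySem.Set.empty PySem.Set.empty ↔ ∃ z ∈ pvNonzeroL grid, ClsFill grid z p := by
    intro p
    exact scanB_inv grid hpre (pvNonzeroL grid) [] PySem.Set.empty PySem.Set.empty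
      (by simp) (by simp [PySem.Set.empty]) (by simp [PySem.Set.empty]) p
  have hout0 : grid.map (fun row => PySem.List.slice row none none) = grid := by
    simp [PySem.List.slice_none_none]
  obtain ⟨hsh, hval⟩ := foldFill_char grid hpre
    (((pvNonzeroL grid).foldl (bodyA grid)
      ((PySem.Set.empty : PySem.Set (Int × Int)),
        ([] : List (List (Int × Int × Int))))).2) grid rfl hAb'
  have hlen2 : PySem.List.len grid = ((grid.length : Int)) := by
    simp [PySem.List.len_eq]
  rw [hA, hB, hout0, hlen2]
  have hcond : ∀ p : Int × Int,
      (PySem.Set.contains (pvScanB (grid.length : Int) (pvNonzeroL grid) (pvNonzeroL grid)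
        PySem.Set.empty PySem.Set.empty) p = true) ↔
      PredBlocks grid (((pvNonzeroL grid).foldl (bodyA grid)
        ((PySem.Set.empty : PySem.Set (Int × Int)),
          ([] : List (List (Int × Int × Int))))).2) p := by
    intro p
    rw [PySem.Set.contains_iff, hBf p, predBlocks_iff grid hAb' hAc' p]
    constructor
    · rintro ⟨z, hz, hcf⟩
      exact ⟨z, (mem_nonzero grid z).mp hz, hcf⟩
    · rintro ⟨z, hz, hcf⟩
      exact ⟨z, (mem_nonzero grid z).mpr hz, hcf⟩
  apply List.ext_getElem
  · rw [shape_len hsh]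
    simp
  intro i h1 h2
  apply List.ext_getElem
  · have := shape_row_len hsh i (by rwa [shape_len hsh] at h1)
    rw [List.getD_eq_getElem _ _ h1, List.getD_eq_getElem _ _ (by rwa [shape_len hsh] at h1)]
      at this
    rw [this]
    simp [List.getElem_mapIdx]
  intro j hj1 hj2
  have higrid : i < grid.length := by rwa [shape_len hsh] at h1
  have hjgrid : j < (grid[i]).length := by
    have := shape_row_len hsh i higrid
    rw [List.getD_eq_getElem _ _ h1, List.getD_eq_getElem _ _ higrid] at this
    omega
  simp only [List.getElem_mapIdx]
  rw [← pvGv_getElem _ i j h1 hj1]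
  have hv := hval ((i : Int), (j : Int)) (by positivity) (by positivity)
  by_cases hc : PySem.Set.contains (pvScanB (grid.length : Int) (pvNonzeroL grid)
      (pvNonzeroL grid) PySem.Set.empty PySem.Set.empty) ((i : Int), (j : Int)) = true
  · rw [if_pos hc]
    exact hv.1 ((hcond _).mp hc)
  · rw [if_neg hc]
    rw [hv.2 (fun hpb => hc ((hcond _).mpr hpb))]
    exact pvGv_getElem grid i j higrid hjgrid

-- ===== VERDICT (by name: the statement is the Claim_ definition above) =====
theorem solve_fcc82909_spec : Claim_equal_solve_fcc82909 := by
  intro grid _ hpre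
  exact main_eq grid hpre
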